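/- GENERATED by mk_final_copies.py from the proof of the farm's unit `start_decoder.6` (farm:start_decoder.6.2: Lemmas.lean) as the
   re-elaboration sweep compiled it — do not edit. -/
import Asan.CheckWalk
import Vorbis.Spec.StartDecoderATest
import Vorbis.Spec.StartDecoderBTest
import Vorbis.Spec.Units.start_decoder_6

open X86 X86.User Asan Vorbis Vorbis.Spec Vorbis.Spec.StartDecoder

set_option maxRecDepth 4000
set_option maxHeartbeats 4000000

namespace Vorbis.Spec.start_decoder_6

/-- The steady stack pointer as a word: `addr g.R` is the entry stack pointer minus 1480. -/
theorem addr_R (g : Ghost) (h : 1480 ≤ (g.e.reg .rsp).toNat) : addr g.R = g.e.reg .rsp - 1480 := by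
  unfold Ghost.R Ghost.RA steady
  have := addr_sub_lit (g.e.reg .rsp).toNat 1480 h
  rw [addr_toNat] at this
  exact this.symm

/-- The steady stack pointer as a number. -/
theorem r_def (g : Ghost) : g.R = (g.e.reg .rsp).toNat - 1480 := id rfl

/-- **Where `*f` is** (one arithmetic fact for `u_omega`): above the text, inside the data space, and off the WHOLE stack of this
activation up to and including the return-address slot — `*f` lies in an object of the callers' frames (above `RA + 8`:
`Frame.callers`) or in an object off the stack region. -/
theorem obj_where {u₀ : State} {g : Ghost} {pc : Word} {A : Arena × List Obj} {v : State} (hfr : Frame u₀ g pc A v)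
    (hh : g.Hand A) :
    0x119d40 ≤ g.f ∧ g.f + 1808 ≤ 0xC00000 ∧
      ((g.e.reg .rsp).toNat + 8 ≤ g.f ∨ g.f + 1808 ≤ 0x700000 ∨ 0x800000 ≤ g.f) := by
  have hw := (hh.obj.mono (frames'_sub g A.2)).where_ hfr.shadow hfr.offText (by decide)
  simp only [Off.sizeof.stb_vorbis] at hw
  obtain ⟨w1, w2, _⟩ := hw
  refine ⟨w1, w2, ?_⟩
  obtain ⟨o, ho, h1, h2⟩ := hh.obj
  simp only [Off.sizeof.stb_vorbis] at h2
  rcases List.mem_append.mp ho with hs | hoth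
  · unfold stackObjs at hs
    obtain ⟨bF, hbF, hin⟩ := List.mem_flatMap.mp hs
    have hmem : bF ∈ g.frames' := List.mem_cons_of_mem _ hbF
    obtain ⟨k1, k2, _, _, _⟩ := hfr.shadow.stack.active bF hmem
    have hg := FrameLayout.objsAt_gran k1 k2 hin
    have hc := hfr.callers bF hbF
    have e : o.gLo = o.base / 8 := rfl
    have eRA : g.RA = (g.e.reg .rsp).toNat := rfl
    left
    omega
  · have := hfr.shadow.off o hoth
    unfold OffStack at this
    omega


/-- The low 32 bits of a small number's word. -/
theorem part32_of_addr (n : Nat) (h : n < 2 ^ 32) : (Word.part Width.w32 (addr n)).toNat = n := by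
  rw [toNat_part32, toNat_addr n (by omega)]
  omega

/-- `movsxd` of a non-negative `int` held as `addr n`. -/
theorem sext_addr (n : Nat) (h : n < 2 ^ 31) :
    Word.ofBV (BitVec.signExtend 64 (Word.part Width.w32 (addr n))) = addr n := by
  apply eq_addr
  rw [toNat_sext32 _ (by rw [part32_of_addr n (by omega)]; exact h)]
  exact part32_of_addr n (by omega)

/-- The signed reading of a non-negative `int` held as `addr n`. -/
theorem toInt_part32_addr (n : Nat) (h : n < 2 ^ 31) : (Word.part Width.w32 (addr n)).toInt = (n : Int) := by
  rw [toInt_of_lt _ (by rw [part32_of_addr n (by omega)]; exact h), part32_of_addr n (by omega)]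

/-- `add r32, 1` on a counter held as `addr n`. -/
theorem inc_addr (n : Nat) (h : n + 1 < 2 ^ 32) : Word.ofBV (Word.part Width.w32 (addr n) + 1#32) = addr (n + 1) := by
  apply eq_addr
  rw [toNat_ofBV32, BitVec.toNat_add, part32_of_addr n (by omega)]
  simp only [BitVec.toNat_ofNat]
  omega

/-- The three comment fields of `*f` (`vendor`, `comment_list_length`, `comment_list`: `[f + 24, f + 48)`) read the same. -/
theorem comment_fields_kept {mem mem' : Mem} {f : Nat} (hf : f + 1808 ≤ 2 ^ 64) (he : Mem.EqOn (f + 24) (f + 48) mem mem') :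
    stb_vorbis.vendor mem' f = stb_vorbis.vendor mem f ∧
      stb_vorbis.comment_list_length mem' f = stb_vorbis.comment_list_length mem f ∧
      stb_vorbis.comment_list mem' f = stb_vorbis.comment_list mem f := by
  refine ⟨?_, ?_, ?_⟩
  · simp only [vacc, voff]
    exact he.u64 _ (by omega) (by omega) (by omega)
  · simp only [vacc, voff]
    exact he.i32 _ (by omega) (by omega) (by omega)
  · simp only [vacc, voff]
    exact he.u64 _ (by omega) (by omega) (by omega)

/-- **The geometry of one activation**, as plain arithmetic for `omega`: where the stack of the activation, the decoder
object `*f`, the arena's buffer and the global `log2_4` lie relative to each other. Nothing of it depends on the memory. -/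
structure Geo (g : Ghost) (A : Arena) : Prop where
  ra_lo : 0x700000 + 1888 ≤ (g.e.reg .rsp).toNat
  ra_hi : (g.e.reg .rsp).toNat + 8 ≤ 0x800000
  ra_8 : (g.e.reg .rsp).toNat % 8 = 0
  f_lo : 0x119d40 ≤ g.f
  f_hi : g.f + 1808 ≤ 0xC00000
  f_off : (g.e.reg .rsp).toNat + 8 ≤ g.f ∨ g.f + 1808 ≤ 0x700000 ∨ 0x800000 ≤ g.f
  f_log : g.f + 1808 ≤ 0x120640 ∨ 0x120650 ≤ g.f
  ar_hi : A.B + A.L ≤ 0xC00000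
  ar_lo : 0x100000 ≤ A.B
  ar_off : A.B + A.L ≤ 0x700000 ∨ 0x800000 ≤ A.B
  ar_log : 0x120650 ≤ A.B ∨ A.B + A.L ≤ 0x120640
  ar_f : g.f + 1808 ≤ A.B ∨ A.B + A.L ≤ g.f

/-- The geometry at a cut point with `Frame`, `Hand`, the arena layer and a lawful block predicate. -/
theorem geo_of {u₀ : State} {g : Ghost} {pc : Word} {A : Arena × List Obj} {v : State} {mem : Mem}
    (hfr : Frame u₀ g pc A v) (hh : g.Hand A) (ha : ArenaOK A.1 A.2 mem g.f) (hok : BlkOK (g.Blk A)) : Geo g A.1 := by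
  obtain ⟨w1, w2, w3⟩ := obj_where hfr hh
  obtain ⟨r1, r2, r3⟩ := hfr.ra
  have eRA : g.RA = (g.e.reg .rsp).toNat := rfl
  simp only [depth] at r2
  have h1 := ha.AR1
  have h1x := ha.AR1x
  have hout := hh.objOut
  simp only [Off.sizeof.stb_vorbis] at hout
  have hlogm : (⟨0x120640, 16⟩ : Block) ∈ fixedBlocks g.len := by
    simp only [fixedBlocks, globalBlocks, List.mem_cons, true_or, or_true]
  have hol := hh.outside _ hlogm
  simp only [] at hol
  have hfl : (objBlock g.f).disjoint ⟨0x120640, 16⟩ := by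
    apply hok.disjoint
    · exact runBlk_extra List.mem_cons_self
    · exact runBlk_extra (List.mem_cons_of_mem _ hlogm)
    · intro e
      have := congrArg Block.size e
      simp only [vblock, voff] at this
      omega
  simp only [vblock, voff] at hfl
  refine ⟨by omega, by omega, by omega, w1, w2, w3, by omega, by omega, by omega, by omega, by omega, by omega⟩

/-- **What a window of the segment's footprint (between two of its points) may be**: the activation's stack BELOW the frame
constants (the callees' frames, the return addresses of the calls), the spill slot of `i` (`[R + 18H]`), three ranges of `*f`
(the comment fields + the allocator's and the readers' fields; the paging fields; the bit reader's fields), the arena's buffer,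
the arena's shadow. None meets a byte the invariant of the point reads besides `Bits`, the arena layer and the shadow, which
are given separately. -/
def OKWin (g : Ghost) (A : Arena) (w : Span) : Prop :=
  ((g.e.reg .rsp).toNat - 1888 ≤ w.lo ∧ w.hi ≤ g.R + 8) ∨
  (g.R + 0x18 ≤ w.lo ∧ w.hi ≤ g.R + 0x20) ∨
  (g.f + 8 ≤ w.lo ∧ w.hi ≤ g.f + 152) ∨
  (g.f + 1480 ≤ w.lo ∧ w.hi ≤ g.f + 1749) ∨
  (g.f + 1750 ≤ w.lo ∧ w.hi ≤ g.f + 1784) ∨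
  (A.B ≤ w.lo ∧ w.hi ≤ A.B + A.L) ∨
  (0xC00000 + A.B / 8 ≤ w.lo ∧ w.hi ≤ 0xC00000 + (A.B + A.L + 7) / 8)

/-- **The common part `Frame` at a later point of the segment**: the stores since (`hs`, windows `OKWin`) missed the saved
registers, the return address, the shadow index and `log2_4`, and stayed inside the function's footprint; what the walk knows of
the new state (rip, rsp, the code, DF / MXCSR) and the shadow layer of the new memory are given. -/
theorem frame_carry {u₀ : State} {g : Ghost} {pc pc' : Word} {A A' : Arena × List Obj} {v s : State} {ws : List Span}
    (hfr : Frame u₀ g pc A v) (hgeo : Geo g A.1) (hs : Mem.SameExcept ws v.mem s.mem) (hw : ∀ w, w ∈ ws → OKWin g A.1 w)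
    (hrip : s.rip = pc') (hrsp : s.reg .rsp = addr g.R) (hcode : CodeOK u₀ s.mem) (hinv : abiInv s)
    (hshadow : ShadowInv A'.2 g.frames' g.R s.mem) (hoff : ∀ o, o ∈ A'.2 → L.textHi ≤ o.base)
    (hext : A.1.Extends A'.1) : Frame u₀ g pc' A' s := by
  obtain ⟨r1, r2, r3, f1, f2, f3, f4, a1, a2, a3, a4, a5⟩ := hgeo
  have eR : g.R = (g.e.reg .rsp).toNat - 1480 := rfl
  have hslots : Mem.EqOn (g.R + 0x598) (g.R + 0x5d0) v.mem s.mem := by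
    apply hs.eqOn
    intro w hw'
    have := hw w hw'
    unfold OKWin at this
    omega
  have hidx : Mem.EqOn (g.R + 8) (g.R + 16) v.mem s.mem := by
    apply hs.eqOn
    intro w hw'
    have := hw w hw'
    unfold OKWin at this
    omega
  have hlog : Mem.EqOn 0x120640 0x120650 v.mem s.mem := by
    apply hs.eqOn
    intro w hw'
    have := hw w hw'
    unfold OKWin at this
    omega
  refine
    { entry := hfr.entry
      rip := hrip
      rsp := hrsp
      shadowIdx := ?_
      saved_rbx := ?_
      saved_rbp := ?_
      saved_r12 := ?_
      saved_r13 := ?_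
      saved_r14 := ?_
      saved_r15 := ?_
      saved_ra := ?_
      code := hcode
      inv := hinv
      shadow := hshadow
      offText := hoff
      ext := hfr.ext.trans hext
      callers := hfr.callers
      sh7 := ?_
      same := ?_ }
  · rw [hidx.u64 _ (by omega) (by omega) (by omega)]
    exact hfr.shadowIdx
  · rw [hslots.u64 _ (by omega) (by omega) (by omega)]
    exact hfr.saved_rbx
  · rw [hslots.u64 _ (by omega) (by omega) (by omega)]
    exact hfr.saved_rbp
  · rw [hslots.u64 _ (by omega) (by omega) (by omega)]
    exact hfr.saved_r12
  · rw [hslots.u64 _ (by omega) (by omega) (by omega)]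
    exact hfr.saved_r13
  · rw [hslots.u64 _ (by omega) (by omega) (by omega)]
    exact hfr.saved_r14
  · rw [hslots.u64 _ (by omega) (by omega) (by omega)]
    exact hfr.saved_r15
  · rw [hslots.u64 _ (by omega) (by omega) (by omega)]
    exact hfr.saved_ra
  · intro i hi
    have e : (UInt64.ofNat (Vorbis.Globals.log2_4.beg + i)).toNat = 0x120640 + i := by
      have : Vorbis.Globals.log2_4.beg = 0x120640 := rfl
      rw [this]
      exact toNat_addr (0x120640 + i) (by omega)
    rw [hlog.readLE _ 1 (by omega) (by omega) (by omega)]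
    exact hfr.sh7 i hi
  · apply hfr.same.step_same hs
    intro w hw' a h1 h2
    have hk := hw w hw'
    have eB := hfr.ext.B
    have eL := hfr.ext.L
    have eRA : g.RA = (g.e.reg .rsp).toNat := rfl
    have ef : (g.e.reg .rdi).toNat = g.f := rfl
    unfold OKWin at hk
    unfold StartDecoder.footprint writes
    rcases hk with k | k | k | k | k | k | k
    · exact ⟨_, List.mem_cons_self, by simp only [depth]; omega, by simp only []; omega⟩
    · exact ⟨_, List.mem_cons_self, by simp only [depth]; omega, by simp only []; omega⟩
    · refine ⟨_, List.mem_cons_of_mem _ List.mem_cons_self, ?_, ?_⟩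
      · simp only [vblock, voff]
        omega
      · simp only [vblock, voff]
        omega
    · refine ⟨_, List.mem_cons_of_mem _ List.mem_cons_self, ?_, ?_⟩
      · simp only [vblock, voff]
        omega
      · simp only [vblock, voff]
        omega
    · refine ⟨_, List.mem_cons_of_mem _ List.mem_cons_self, ?_, ?_⟩
      · simp only [vblock, voff]
        omega
      · simp only [vblock, voff]
        omega
    · refine ⟨_, List.mem_cons_of_mem _ (List.mem_cons_of_mem _ (List.mem_cons_of_mem _ List.mem_cons_self)), ?_, ?_⟩
      · simp only []
        omega
      · simp only []
        omega
    · refine ⟨_, List.mem_cons_of_mem _ (List.mem_cons_of_mem _ (List.mem_cons_of_mem _ (List.mem_cons_of_mem _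
        List.mem_cons_self))), ?_, ?_⟩
      · simp only [shadowSpan]
        omega
      · simp only [shadowSpan]
        omega

/-- **The invariant `SDw … 1` at a later point of the segment**, possibly for a grown ghost arena `A'`: the stores since (`hs`,
windows `OKWin`) missed the header fields, the zero rest, `first_decode`, `discard_samples_deferred` and the frame constants; the
environment, the arena layer and `Bits` of the new memory are given (the callee's post, or their own frame lemmas). -/
theorem sdw_carry {g : Ghost} {A A' : Arena × List Obj} {mem mem' : Mem} {ws : List Span}
    (h : SDw g.len 1 A (g.Blk A) (g.Live A) mem g.f g.R) (hgeo : Geo g A.1)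
    (hs : Mem.SameExcept ws mem mem') (hw : ∀ w, w ∈ ws → OKWin g A.1 w)
    (henv : Env (g.Blk A') (g.Live A') mem') (harena : ArenaOK A'.1 A'.2 mem' g.f)
    (hbits : Bits (g.Blk A') g.len mem' g.f) : SDw g.len 1 A' (g.Blk A') (g.Live A') mem' g.f g.R := by
  obtain ⟨r1, r2, r3, f1, f2, f3, f4, a1, a2, a3, a4, a5⟩ := hgeo
  have eR : g.R = (g.e.reg .rsp).toNat - 1480 := rfl
  have hc1 : Mem.EqOn (g.R + 8) (g.R + 0x18) mem mem' := by
    apply hs.eqOn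
    intro w hw'
    have := hw w hw'
    unfold OKWin at this
    omega
  have hc2 : Mem.EqOn (g.R + 0x20) (g.R + 0x24) mem mem' := by
    apply hs.eqOn
    intro w hw'
    have := hw w hw'
    unfold OKWin at this
    omega
  have he : ObjEq [(0, 8), (152, 1480), (1749, 1750), (1784, 1788)] mem g.f mem' g.f := by
    apply ObjEq.of_sameExcept hs
    · intro w hw'
      simp only [List.mem_cons, List.mem_nil_iff, or_false] at hw'
      rcases hw' with rfl | rfl | rfl | rfl <;> simp only [] <;> omega
    · intro w hw' sp hsp
      have := hw sp hsp
      unfold OKWin at this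
      simp only [List.mem_cons, List.mem_nil_iff, or_false] at hw'
      rcases hw' with rfl | rfl | rfl | rfl <;> simp only [] <;> omega
  refine
    { env := henv
      frame := ?_
      arena := harena
      setups := up g A'
      bits := hbits
      first := ?_
      discard0 := ?_
      header := fun _ => ?_
      cb0 := fun h3 => absurd h3 (by omega)
      rest := ?_ }
  · obtain ⟨c1, c2, c3, c4, c5⟩ := h.frame
    refine ⟨c1, ?_, ?_, ?_, ?_⟩
    · rw [hc1.u64 (g.R + 8) (by omega) (by omega) (by omega)]
      exact c2
    · rw [hc2.u32 (g.R + 0x20) (by omega) (by omega) (by omega)]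
      exact c3
    · intro hk
      rw [hc1.u8 (g.R + 0x10) (by omega) (by omega) (by omega)]
      exact c4 hk
    · intro hk1 hk2
      omega
  · have e : stb_vorbis.first_decode mem' g.f = stb_vorbis.first_decode mem g.f := by
      simp only [vacc, voff]
      exact he.u8 1749 (by decide)
    rw [e]
    exact h.first
  · have e : stb_vorbis.discard_samples_deferred mem' g.f = stb_vorbis.discard_samples_deferred mem g.f := by
      simp only [vacc, voff]
      exact he.i32 1784 (by decide)
    rw [e]
    exact h.discard0
  · apply (h.header (by omega)).transfer
    exact he.sub (by decide)
  · intro o ho1 ho2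
    have hz := h.rest o ho1 ho2
    have hr : restFrom 1 = 160 := by decide
    rw [hr] at ho1
    simp only [voff] at ho2
    have hmem : ((152, 1480) : Nat × Nat) ∈ [((0 : Nat), (8 : Nat)), (152, 1480), (1749, 1750), (1784, 1788)] := by
      simp only [List.mem_cons, true_or, or_true]
    rw [he (152, 1480) hmem o (by simp only []; omega) ho2]
    exact hz

/-- **The stricter window predicate of the loop body**: as `OKWin`, but inside `*f` only the ranges that meet neither the comment
fields `[f + 24, f + 48)` nor the arena fields `[f + 112, f + 136)`. -/
def OKWinS (g : Ghost) (A : Arena) (w : Span) : Prop :=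
  ((g.e.reg .rsp).toNat - 1888 ≤ w.lo ∧ w.hi ≤ g.R + 8) ∨
  (g.R + 0x18 ≤ w.lo ∧ w.hi ≤ g.R + 0x20) ∨
  (g.f + 8 ≤ w.lo ∧ w.hi ≤ g.f + 24) ∨
  (g.f + 48 ≤ w.lo ∧ w.hi ≤ g.f + 112) ∨
  (g.f + 136 ≤ w.lo ∧ w.hi ≤ g.f + 152) ∨
  (g.f + 1480 ≤ w.lo ∧ w.hi ≤ g.f + 1749) ∨
  (g.f + 1750 ≤ w.lo ∧ w.hi ≤ g.f + 1784) ∨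
  (A.B ≤ w.lo ∧ w.hi ≤ A.B + A.L) ∨
  (0xC00000 + A.B / 8 ≤ w.lo ∧ w.hi ≤ 0xC00000 + (A.B + A.L + 7) / 8)

/-- A strict window is a window. -/
theorem OKWinS.ok {g : Ghost} {A : Arena} {w : Span} (h : OKWinS g A w) : OKWin g A w := by
  unfold OKWinS at h
  unfold OKWin
  omega

/-- Stores inside strict windows keep the comment fields and the arena fields of `*f`. -/
theorem kept_strict {g : Ghost} {A : Arena} {mem mem' : Mem} {ws : List Span} (hgeo : Geo g A)
    (hs : Mem.SameExcept ws mem mem') (hw : ∀ w, w ∈ ws → OKWinS g A w) :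
    Mem.EqOn (g.f + 24) (g.f + 48) mem mem' ∧ Mem.EqOn (g.f + 112) (g.f + 136) mem mem' := by
  obtain ⟨r1, r2, r3, f1, f2, f3, f4, a1, a2, a3, a4, a5⟩ := hgeo
  have eR : g.R = (g.e.reg .rsp).toNat - 1480 := rfl
  constructor
  · apply hs.eqOn
    intro w hw'
    have := hw w hw'
    unfold OKWinS at this
    omega
  · apply hs.eqOn
    intro w hw'
    have := hw w hw'
    unfold OKWinS at this
    omega

/-- **`Body6` at the next arrival at the loop head** (the back edge 0x113f24 → 0x113f28), same ghost arena: the stores of the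
iteration (`hs`, strict windows: the callee's frame and its fields of `*f`, the return addresses, one byte of the vendor block)
wrote no shadow byte; `Bits` of the new memory from get8_packet's post. -/
theorem body6_next {u₀ : State} {g : Ghost} {A : Arena × List Obj} {i i' len : Nat} {v s : State} {ws : List Span}
    (hb : Body6 u₀ g A i len v) (hgeo : Geo g A.1) (hs : Mem.SameExcept ws v.mem s.mem)
    (hw : ∀ w, w ∈ ws → OKWinS g A.1 w) (hun : ShadowUntouched v.mem s.mem)
    (hbits : Bits (g.Blk A) g.len s.mem g.f) (hrip : s.rip = pc_6) (hrsp : s.reg .rsp = addr g.R)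
    (hcode : CodeOK u₀ s.mem) (hinv : abiInv s) (hrbp : s.reg .rbp = addr g.f) (hr12 : s.reg .r12 = addr i')
    (hr13 : s.reg .r13 = addr len) (hi' : i' ≤ len) : Body6 u₀ g A i' len s := by
  have hw' : ∀ w, w ∈ ws → OKWin g A.1 w := fun w h => (hw w h).ok
  obtain ⟨k1, k2⟩ := kept_strict hgeo hs hw
  have hf : g.f + 1808 ≤ 2 ^ 64 := by
    have := hgeo.f_hi
    omega
  obtain ⟨e1, e2, e3⟩ := comment_fields_kept hf k1
  have harena : ArenaOK A.1 A.2 s.mem g.f := by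
    apply hb.sd.arena.frame
    · simp only [voff]
      omega
    · simp only [voff]
      exact k2
  refine
    { frame := frame_carry hb.frame hgeo hs hw' hrip hrsp hcode hinv (hb.frame.shadow.untouched hun) hb.frame.offText
        (Arena.Extends.refl _)
      hand := hb.hand
      rbp := hrbp
      sd := sdw_carry hb.sd hgeo hs hw' (hb.sd.env.eqOn hun) harena hbits
      noTemps := hb.noTemps
      r12 := hr12
      r13 := hr13
      i_le := hi'
      len_le := hb.len_le
      vendor := ?_
      length0 := ?_
      list0 := ?_ }
  · rw [e1]
    exact hb.vendor
  · rw [e2]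
    exact hb.length0
  · rw [e3]
    exact hb.list0

/-- **Windows that miss every field `Bits` reads** (and the header, the zero rest …): the stack below the frame constants, the
slot of `i`, `[f + 8, f + 48)` (`setup_memory_required`, the comment fields), `[f + 72, f + 152)` (the arena fields, `error`), the
arena's buffer and its shadow. Everything the segment itself stores after its last reader call. -/
def OKWinB (g : Ghost) (A : Arena) (w : Span) : Prop :=
  ((g.e.reg .rsp).toNat - 1888 ≤ w.lo ∧ w.hi ≤ g.R + 8) ∨
  (g.R + 0x18 ≤ w.lo ∧ w.hi ≤ g.R + 0x20) ∨
  (g.f + 8 ≤ w.lo ∧ w.hi ≤ g.f + 48) ∨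
  (g.f + 72 ≤ w.lo ∧ w.hi ≤ g.f + 152) ∨
  (A.B ≤ w.lo ∧ w.hi ≤ A.B + A.L) ∨
  (0xC00000 + A.B / 8 ≤ w.lo ∧ w.hi ≤ 0xC00000 + (A.B + A.L + 7) / 8)

/-- Such a window is a window. -/
theorem OKWinB.ok {g : Ghost} {A : Arena} {w : Span} (h : OKWinB g A w) : OKWin g A w := by
  unfold OKWinB at h
  unfold OKWin
  omega

/-- `Bits` over stores that miss its fields. -/
theorem bits_carry {g : Ghost} {A : Arena} {Blk : Block → Prop} {mem mem' : Mem} {ws : List Span} (hgeo : Geo g A)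
    (h : Bits Blk g.len mem g.f) (hs : Mem.SameExcept ws mem mem') (hw : ∀ w, w ∈ ws → OKWinB g A w) :
    Bits Blk g.len mem' g.f := by
  obtain ⟨r1, r2, r3, f1, f2, f3, f4, a1, a2, a3, a4, a5⟩ := hgeo
  have eR : g.R = (g.e.reg .rsp).toNat - 1480 := rfl
  apply h.frame_fields
  apply Bits.SameFields.of_sameExcept hs
  all_goals
    intro w hw'
    have := hw w hw'
    unfold OKWinB at this
    omega

/-- **The environment of a check site for a grown ghost arena** (`setup_malloc` returned a block: one more live object): the
shadow layer of the new memory covers the new live set; the block predicate stays lawful (`ArenaOK.runBlk_ok`: `*f` and the fixed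
objects lie outside the arena's buffer, which never moves); every block is live. -/
theorem env_grow {g : Ghost} {A A' : Arena × List Obj} {mem mem' : Mem}
    (henv : Env (g.Blk A) (g.Live A) mem) (hh' : g.Hand A') (hsub : ∀ o, o ∈ A.2 → o ∈ A'.2)
    (hshadow : ShadowInv A'.2 g.frames' g.R mem') (harena : ArenaOK A'.1 A'.2 mem' g.f) :
    Env (g.Blk A') (g.Live A') mem' := by
  refine ⟨hshadow.shadow.covers, ?_, ?_⟩
  · apply harena.runBlk_ok
    · exact henv.ok.sub (fun B hB => Or.inr hB)
    · intro C hC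
      rcases List.mem_cons.mp hC with rfl | hm
      · exact hh'.objOut
      · exact hh'.outside C hm
  · intro B hB
    rcases hB with hs | hx
    · exact harena.blkLive (fun o ho => List.mem_append_right _ ho) B hs
    · refine Block.live.mono (henv.live B (Or.inr hx)) ?_
      intro x hx'
      obtain ⟨o, ho, hbx⟩ := hx'
      refine ⟨o, ?_, hbx⟩
      rcases List.mem_append.mp ho with h1 | h2
      · exact List.mem_append_left _ h1
      · exact List.mem_append_right _ (hsub o h2)

/-- **`Body7` with `i = 0` at 0x11409e**, for the ghost arena `A'` (the entry's, or the one `setup_malloc` left): the stores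
since the loop head (`hs`) are inside windows `OKWin`; the shadow layer, the arena layer and `Bits` of the new memory are given;
`vendor` is unchanged, CM2 holds for the new `comment_list_length` / `comment_list`, every slot of the table is NULL, and the spill
slot of `i` holds 0. -/
theorem body7_exit {u₀ : State} {g : Ghost} {A A' : Arena × List Obj} {len : Nat} {v s : State} {ws : List Span}
    (hb : Body6 u₀ g A len len v) (hgeo : Geo g A.1) (hs : Mem.SameExcept ws v.mem s.mem)
    (hw : ∀ w, w ∈ ws → OKWin g A.1 w) (hext : A.1.Extends A'.1) (hsub : ∀ o, o ∈ A.2 → o ∈ A'.2)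
    (hshadow : ShadowInv A'.2 g.frames' g.R s.mem) (hoff : ∀ o, o ∈ A'.2 → L.textHi ≤ o.base)
    (harena : ArenaOK A'.1 A'.2 s.mem g.f) (hno : A'.1.temps = []) (hbits : Bits (g.Blk A) g.len s.mem g.f)
    (hvend : stb_vorbis.vendor s.mem g.f = stb_vorbis.vendor v.mem g.f) (hcm2 : CM2 A'.1.Blk s.mem g.f)
    (hnull : ∀ i : Nat, (i : Int) < stb_vorbis.comment_list_length s.mem g.f →
      s.mem.ptr (stb_vorbis.comment_list_at s.mem g.f i) = 0)
    (hslot : s.mem.u32 (g.R + 0x18) = 0) (hrip : s.rip = pc_7) (hrsp : s.reg .rsp = addr g.R)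
    (hcode : CodeOK u₀ s.mem) (hinv : abiInv s) (hrbp : s.reg .rbp = addr g.f) : Body7 u₀ g A' 0 s := by
  have hh' : g.Hand A' := hb.hand.mono hext hsub
  have henv := env_grow hb.sd.env hh' hsub hshadow harena
  have hbits' : Bits (g.Blk A') g.len s.mem g.f :=
    hbits.reblk (runBlk_extra List.mem_cons_self)
      (runBlk_extra (List.mem_cons_of_mem _ List.mem_cons_self))
  refine
    { frame := frame_carry hb.frame hgeo hs hw hrip hrsp hcode hinv hshadow hoff hext
      hand := hh'
      rbp := hrbp
      sd := sdw_carry hb.sd hgeo hs hw henv harena hbits'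
      noTemps := hno
      slot_i := hslot
      i_le := by omega
      comment :=
        { CM1 := Or.inr ⟨len, by have := hb.len_le; omega, by rw [hvend]; exact hb.vendor.mono hext⟩
          CM2 := hcm2
          CM3 := ⟨fun i hi => absurd hi (Nat.not_lt_zero i), fun i _ hi => hnull i hi⟩
          le := Or.inr rfl } }

/-- **The epilogue's entry assertion after `return error(…)`** (0x113b22 with eax = 0), same ghost arena: the stores since the loop
head are inside windows `OKWin`, no shadow byte was written, `comment_list_length` was reset to 0 (FIX 2: H1's first disjunct). -/
theorem err_exit {u₀ : State} {g : Ghost} {A : Arena × List Obj} {len : Nat} {v s : State} {ws : List Span}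
    (hb : Body6 u₀ g A len len v) (hgeo : Geo g A.1) (hs : Mem.SameExcept ws v.mem s.mem)
    (hw : ∀ w, w ∈ ws → OKWin g A.1 w) (hun : ShadowUntouched v.mem s.mem) (harena : ArenaOK A.1 A.2 s.mem g.f)
    (hbits : Bits (g.Blk A) g.len s.mem g.f) (hn : stb_vorbis.comment_list_length s.mem g.f ≤ 0)
    (hrax : (s.reg .rax).toNat % 2 ^ 32 = 0) (hrip : s.rip = pc_ERR) (hrsp : s.reg .rsp = addr g.R)
    (hcode : CodeOK u₀ s.mem) (hinv : abiInv s) : AtERR u₀ g s := by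
  have hsd := sdw_carry hb.sd hgeo hs hw (hb.sd.env.eqOn hun) harena hbits
  exact ⟨A, frame_carry hb.frame hgeo hs hw hrip hrsp hcode hinv (hb.frame.shadow.untouched hun) hb.frame.offText
    (Arena.Extends.refl _), hb.hand, Or.inl ⟨hrax, SDw.failed hsd (by omega) (Or.inl hn)⟩⟩

/-- **The body of loop 3682** (`f->vendor[i] = get8_packet(f)`, 0x113f28 → 0x113efe … 0x113f24 → 0x113f28) for `i < len`: from
`Body6 … i` at the loop head back to the head with `Body6 … (i + 1)`; the measure `len − r12` drops. -/
theorem loop_body {Lay : Layout} (hLay : Lay.hi = 0x1000000) {μ : Microarch} (hμ : UserX.MicroOK μ) {u₀ : State}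
    (hcode : HasCodeNat Lay u₀ Vorbis.L.start_decoder.entry Vorbis.Code.code_start_decoder.nat Vorbis.L.start_decoder.size)
    {g : Ghost} {A : Arena × List Obj} {i len : Nat} {v : State}
    (hg8 : Calls Lay μ Vorbis.WayInv (Vorbis.conv u₀) Vorbis.L.get8_packet.entry
      (Vorbis.Spec.get8_packet.spec A.2 g.frames' (g.Blk A) g.len))
    (h_ld8 : Asan.SmallCheck Lay μ Vorbis.WayInv (Vorbis.CodeOK u₀) [.rax, .rcx, .rdx] 8 Vorbis.L.__asan_load8_noabort.entry)
    (h_st1 : Asan.SmallCheck Lay μ Vorbis.WayInv (Vorbis.CodeOK u₀) [.rax, .rdx] 1 Vorbis.L.__asan_store1_noabort.entry)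
    (hb : Body6 u₀ g A i len v) (hilt : i < len) :
    ReachVia Lay μ WayInv v (fun v' => (At7 u₀ g v' ∨ AtERR u₀ g v') ∨
      (∃ i, Body6 u₀ g A i len v') ∧ len - (v'.reg .r12).toNat < len - (v.reg .r12).toNat) := by
  have he := hb.frame.entry
  v_entry he
  simp only [depth] at he_room he_stack
  have hR := r_def g
  have hgeo := geo_of hb.frame hb.hand hb.sd.arena hb.sd.env.ok
  obtain ⟨g1, g2, g3, g4, g5, g6, g7, g8, g9, g10, g11, g12⟩ := hgeo
  have hlen := hb.len_le
  have hfr := hb.frame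
  have hgeo := geo_of hb.frame hb.hand hb.sd.arena hb.sd.env.ok
  have v_rip : v.rip = Vorbis.L.start_decoder.cut50 := hfr.rip
  have v_rsp : v.reg .rsp = g.e.reg .rsp - 1480 := by
    rw [hfr.rsp]
    exact addr_R g (by omega)
  have v_rbp : v.reg .rbp = addr g.f := hb.rbp
  have v_r12 : v.reg .r12 = addr i := hb.r12
  have v_r13 : v.reg .r13 = addr len := hb.r13
  have w_eq : Mem.EqOn Vorbis.L.textLo Vorbis.L.textHi u₀.mem v.mem := hfr.code
  have hdf : v.flags .df = false := (show abiInv _ from hfr.inv).1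
  have hmx : v.mxcsr &&& 0x1F80 = 0x1F80 := (show abiInv _ from hfr.inv).2
  have hsse := Vorbis.sseOK_of_abiInv hfr.inv
  have r24 : v.mem.readLE (addr g.f + 24) 8 = stb_vorbis.vendor v.mem g.f := by
    simp only [vfield, vacc, voff]
  have hf64 : (addr g.f).toNat = g.f := toNat_addr g.f (by omega)
  have hile := hb.i_le
  have hti : (Word.part Width.w32 (addr i)).toInt = (i : Int) := toInt_part32_addr i (by omega)
  have htl : (Word.part Width.w32 (addr len)).toInt = (len : Int) := toInt_part32_addr len (by omega)
  u_walk hcode [hμ.vendor] until [Vorbis.L.start_decoder.cut50, Vorbis.L.start_decoder.cut60, Vorbis.L.start_decoder.cut4] span [Vorbis.L.textLo, Vorbis.L.textHi] side (v_side)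
  · -- call_inv at 0x113f01
    v_inv
  · -- pre of get8_packet
    show ReaderPre A.2 g.frames' (g.Blk A) g.len s_113f01
    refine ⟨shadowPre_call hfr ?_ ?_, ?_, ?_⟩
    · rw [w_rsp]
      u_omega
    · v_untouched
    · rw [w_rdi, hf64]
      exact readerEnv hb.hand hb.sd.env.live
    · rw [w_rdi, hf64, w_mem]
      exact (Reader.store_off_obj hb.sd.bits _ 8 _ (by u_omega) (by u_omega)).1.bits
  case cont =>
    -- after get8_packet returned (0x113f06)
    v_after_call w_rsp_113f01 w_mem_113f01
    simp only [w_rdi_113f01, hf64] at w_same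
    have hpost : Get8PacketPost (g.Blk A) g.len g.f s_113f01 s_113f01r := by
      have := w_post
      simp only [get8_packet.spec, w_rdi_113f01, hf64] at this
      exact this
    have r24' : s_113f01r.mem.readLE (addr g.f + 24) 8 = stb_vorbis.vendor v.mem g.f := by
      u_frame r24
    have hsame1 : Mem.SameExcept [⟨(g.e.reg .rsp).toNat - 1888, (g.e.reg .rsp).toNat - 1480⟩,
        ⟨g.f + 48, g.f + 56⟩, ⟨g.f + 84, g.f + 96⟩, ⟨g.f + 136, g.f + 144⟩, ⟨g.f + 1484, g.f + 1749⟩,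
        ⟨g.f + 1752, g.f + 1764⟩, ⟨g.f + 1768, g.f + 1784⟩] v.mem s_113f01r.mem := by
      u_same
    obtain ⟨z, w_rax⟩ : ∃ z, s_113f01r.reg .rax = z := ⟨_, rfl⟩
    have hun1 : ShadowUntouched v.mem s_113f01r.mem := by v_untouched
    have hvin := arena_inside hb.sd.arena hb.vendor
    simp only [] at hvin
    obtain ⟨hv1, hv2⟩ := hvin
    have gtext : 1154368 ≤ A.1.B := hb.hand.arenaText
    have hobj : LiveIn A.2 g.frames' g.f 1808 := hb.hand.obj.mono (frames'_sub g A.2)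
    have hvl : LiveIn A.2 g.frames' (stb_vorbis.vendor v.mem g.f) (len + 1) := liveIn_of_arenaBlk hb.sd.arena hb.vendor
    have hsx := sext_addr i (by omega)
    have hav : (addr (i + stb_vorbis.vendor v.mem g.f)).toNat = i + stb_vorbis.vendor v.mem g.f :=
      toNat_addr _ (by omega)
    u_walk hcode [hμ.vendor] until [Vorbis.L.start_decoder.cut50, Vorbis.L.start_decoder.cut60, Vorbis.L.start_decoder.cut4] span [Vorbis.L.textLo, Vorbis.L.textHi] side (v_side)
    · -- check_113f0d: the load of `f->vendor`
      have hun : ShadowUntouched v.mem s_113f0d.mem := by v_untouched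
      exact hobj.accSmall hfr.shadow hun _ 8 (by decide) (by u_omega) (by u_omega)
    · -- check_113f1c: the store `vendor[i]`
      have hun : ShadowUntouched v.mem s_113f1c.mem := by v_untouched
      rw [hsx, addr_add]
      exact hvl.accSmall hfr.shadow hun _ 1 (by decide) (by omega) (by omega)
    · -- side_code: the store misses the text
      rw [hsx, addr_add, hav]
      omega
    · -- the back edge 0x113f24 → 0x113f28
      rw [hsx, addr_add] at w_mem
      have hs : Mem.SameExcept [⟨(g.e.reg .rsp).toNat - 1888, (g.e.reg .rsp).toNat - 1480⟩,
          ⟨g.f + 48, g.f + 56⟩, ⟨g.f + 84, g.f + 96⟩, ⟨g.f + 136, g.f + 144⟩, ⟨g.f + 1484, g.f + 1749⟩,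
          ⟨g.f + 1752, g.f + 1764⟩, ⟨g.f + 1768, g.f + 1784⟩, ⟨A.1.B, A.1.B + A.1.L⟩] v.mem s_113f24.mem := by
        u_same
      have hw : ∀ w, w ∈ [(⟨(g.e.reg .rsp).toNat - 1888, (g.e.reg .rsp).toNat - 1480⟩ : Span),
          ⟨g.f + 48, g.f + 56⟩, ⟨g.f + 84, g.f + 96⟩, ⟨g.f + 136, g.f + 144⟩, ⟨g.f + 1484, g.f + 1749⟩,
          ⟨g.f + 1752, g.f + 1764⟩, ⟨g.f + 1768, g.f + 1784⟩, ⟨A.1.B, A.1.B + A.1.L⟩] → OKWinS g A.1 w := by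
        simp only [List.forall_mem_cons, List.not_mem_nil, false_imp_iff, implies_true, and_true, OKWinS]
        omega
      have hs2 : Mem.SameExcept [⟨(g.e.reg .rsp).toNat - 1888, (g.e.reg .rsp).toNat - 1480⟩,
          ⟨A.1.B, A.1.B + A.1.L⟩] s_113f01r.mem s_113f24.mem := by
        u_same
      have hw2 : ∀ w, w ∈ [(⟨(g.e.reg .rsp).toNat - 1888, (g.e.reg .rsp).toNat - 1480⟩ : Span),
          ⟨A.1.B, A.1.B + A.1.L⟩] → OKWinB g A.1 w := by
        simp only [List.forall_mem_cons, List.not_mem_nil, false_imp_iff, implies_true, and_true, OKWinB]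
        omega
      have hbits := bits_carry hgeo hpost.reader.bits hs2 hw2
      have hun : ShadowUntouched v.mem s_113f24.mem := by v_untouched
      have hinv : abiInv s_113f24 := by v_inv
      refine ReachVia.done (Or.inr ⟨⟨i + 1, ?_⟩, ?_⟩)
      · refine body6_next hb hgeo hs hw hun hbits ?_ ?_ w_eq hinv ?_ ?_ ?_ (by omega)
        · rw [w_rip]
        · rw [w_rsp]
          exact (addr_R g (by omega)).symm
        · rw [w_kept .rbp rfl]
          exact v_rbp
        · rw [w_r12]
          exact inc_addr i (by omega)
        · rw [w_kept .r13 rfl]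
          exact v_r13
      · rw [w_r12, inc_addr i (by omega), toNat_addr (i + 1) (by omega), toNat_addr i (by omega)]
        omega

/-- A 32-bit value that is zero or has its sign bit set is not positive as an `int`. -/
theorem sint32_nonpos (x : BitVec 32) (h : x.toNat = 0 ∨ x.msb = true) : sint32 x.toNat ≤ 0 := by
  have hx := x.isLt
  rcases sint32_cases x.toNat with ⟨h1, h2⟩ | ⟨h1, h2⟩
  · rcases h with h0 | hm
    · omega
    · rw [BitVec.msb_eq_decide] at hm
      simp only [decide_eq_true_eq] at hm
      omega
  · omega

/-- A 32-bit value that is not zero and has its sign bit clear is positive as an `int`, and is its unsigned value. -/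
theorem sint32_pos (x : BitVec 32) (h0 : ¬ x.toNat = 0) (hm : x.msb = false) :
    0 < sint32 x.toNat ∧ sint32 x.toNat = (x.toNat : Int) ∧ x.toNat < 2 ^ 31 := by
  rw [BitVec.msb_eq_decide] at hm
  simp only [decide_eq_false_iff_not, Nat.not_le] at hm
  rcases sint32_cases x.toNat with ⟨h1, h2⟩ | ⟨h1, h2⟩
  · omega
  · omega

/-- The `int` field `comment_list_length` from the four bytes the walker read back. -/
theorem length_of_read {mem : Mem} {f x : Nat} (h : mem.readLE (addr f + 32) 4 = x) :
    stb_vorbis.comment_list_length mem f = sint32 x := by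
  simp only [vacc, voff]
  rw [addr_add_lit] at h
  unfold Mem.i32 Mem.u32
  rw [h]

/-- The pointer field `comment_list` from the eight bytes the walker read back. -/
theorem list_of_read {mem : Mem} {f x : Nat} (h : mem.readLE (addr f + 40) 8 = x) :
    stb_vorbis.comment_list mem f = x := by
  simp only [vacc, voff]
  rw [addr_add_lit] at h
  unfold Mem.u64
  exact h

/-- `lea esi, [r13*8]` for a count `n ≤ 0FFFFFFFH` (FIX 2): the 32-bit size `8·n`, no wrap. -/
theorem lea8 (x : BitVec 32) (h : x.toNat ≤ 0xfffffff) :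
    (Word.ofBV (BitVec.setWidth 32 (Word.ofBV x * 8).toBitVec)).toNat = 8 * x.toNat := by
  rw [toNat_ofBV32, BitVec.toNat_setWidth, UInt64.toNat_toBitVec, UInt64.toNat_mul, toNat_ofBV32]
  have : (8 : UInt64).toNat = 8 := rfl
  rw [this]
  omega

/-- FIX 2's first test not taken: the count is at most `0FFFFFFFH`. -/
theorem le_of_not_jg (x : BitVec 32) (h : ¬ (268435455#32).toInt < x.toInt) (hm : x.msb = false) :
    x.toNat ≤ 0xfffffff := by
  rw [BitVec.msb_eq_decide] at hm
  simp only [decide_eq_false_iff_not, Nat.not_le] at hm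
  rw [toInt_of_lt x (by omega)] at h
  have e : (268435455#32).toInt = 268435455 := by decide
  rw [e] at h
  omega

/-- **The success arm of the allocation **: when the request fits, the shadow window
of `setup_malloc`'s footprint lies inside the shadow of the arena's buffer: it is a window `OKWin` (so `frame_carry` / `sdw_carry` /
`body7_exit` apply to the stores through the call). -/
theorem okwin_new_shadow (g : Ghost) (A : Arena) (n : Nat) (hfit : A.Fits n) (hTL : A.T ≤ A.L) :
    OKWin g A (shadowSpan (A.B + A.S + 32) (A.B + A.S + 32 + n)) := by
  unfold Arena.Fits at hfit
  have hr := le_r8 n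
  unfold OKWin shadowSpan
  simp only []
  omega

/-- **CM3's second half after FIX 12's `memset(f->comment_list, 0, 8·n)`** (success arm): every slot of the table reads NULL, from
memset's bytewise post. -/
theorem null_of_zero {mem : Mem} {f p n : Nat} (_hp : p + 8 * n < 2 ^ 64) (hlist : stb_vorbis.comment_list mem f = p)
    (hz : ∀ j, j < 8 * n → mem.readLE (addr p + UInt64.ofNat j) 1 = 0) (hlen : stb_vorbis.comment_list_length mem f = (n : Int)) :
    ∀ i : Nat, (i : Int) < stb_vorbis.comment_list_length mem f → mem.ptr (stb_vorbis.comment_list_at mem f i) = 0 := by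
  intro i hi
  rw [hlen] at hi
  have hin : i < n := by omega
  unfold stb_vorbis.comment_list_at
  rw [hlist]
  unfold Mem.ptr
  apply readLE_addr_zero
  intro k hk
  have h := hz (8 * i + k) (by omega)
  rw [addr_add] at h
  have e : mem.readLE (addr (p + (8 * i + k))) 1 = (mem.read (addr (p + (8 * i + k)))).toNat := by
    exact Mem.readLE_one mem _
  rw [e] at h
  rw [Nat.add_assoc]
  exact UInt8.toNat_inj.mp h



/-- Two footprints in sequence: the union of their windows. -/
theorem sameExcept_append {ws1 ws2 : List Span} {m1 m2 m3 : Mem} (h1 : Mem.SameExcept ws1 m1 m2)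
    (h2 : Mem.SameExcept ws2 m2 m3) : Mem.SameExcept (ws1 ++ ws2) m1 m3 := by
  refine Mem.SameExcept.trans (h1.mono ?_) (h2.mono ?_)
  · intro w hw a h1 h2
    exact ⟨w, List.mem_append_left _ hw, h1, h2⟩
  · intro w hw a h1 h2
    exact ⟨w, List.mem_append_right _ hw, h1, h2⟩

/-- **The assertion after `setup_malloc(f, 8·n)` returned** (0x113fb7; C line 3691), for the ghost arena `A'` of the moment (grown
by the table on success), the vendor length `len` and the comment count `n` (FIX 2: `1 ≤ n ≤ 0FFFFFFFH`): the weak point `SDw 1`,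
CM1, `comment_list_length = n`, `comment_list` still NULL, and the result in rax: NULL, or the arena's new block of exactly `8·n`
bytes. -/
structure AtRet (u₀ : State) (g : Ghost) (A' : Arena × List Obj) (len n : Nat) (r : State) : Prop where
  frame : Frame u₀ g Vorbis.L.start_decoder.cut53 A' r
  hand : g.Hand A'
  rbp : r.reg .rbp = addr g.f
  sd : SDw g.len 1 A' (g.Blk A') (g.Live A') r.mem g.f g.R
  noTemps : A'.1.temps = []
  len_le : len ≤ 0x7ffffffe
  vendor : A'.1.Blk ⟨stb_vorbis.vendor r.mem g.f, len + 1⟩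
  n_pos : 1 ≤ n
  n_le : n ≤ 0xfffffff
  length : stb_vorbis.comment_list_length r.mem g.f = (n : Int)
  list0 : stb_vorbis.comment_list r.mem g.f = 0
  result : r.reg .rax = 0 ∨ ((r.reg .rax).toNat ≠ 0 ∧ A'.1.Blk ⟨(r.reg .rax).toNat, 8 * n⟩)

/-- **The return of `setup_malloc(f, 8·n)`** (0x113fb2 → 0x113fb7), without the machine: from the loop-exit state `v` (`Body6`), what
the walk knows of the callee's entry state `s` (the stores since `v` in windows `OKWin`, the comment fields, the arguments) and of
the returned state `r` (the callee's footprint and post, rip, rsp, the code, DF / MXCSR, rbp) to `AtRet` — for the grown ghost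
arena when the request fitted, for the same arena (and the failure clause's two windows) when it did not. -/
theorem ret_of_call {u₀ : State} {g : Ghost} {A : Arena × List Obj} {len n : Nat} {v s r : State} {ws0 : List Span}
    (hb : Body6 u₀ g A len len v) (hgeo : Geo g A.1)
    (hs0 : Mem.SameExcept ws0 v.mem s.mem) (hw0 : ∀ w, w ∈ ws0 → OKWin g A.1 w)
    (hun0 : ShadowUntouched v.mem s.mem) (hbits0 : Bits (g.Blk A) g.len s.mem g.f)
    (hvend : stb_vorbis.vendor s.mem g.f = stb_vorbis.vendor v.mem g.f)
    (hlen : stb_vorbis.comment_list_length s.mem g.f = (n : Int)) (hn1 : 1 ≤ n) (hn2 : n ≤ 0xfffffff)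
    (hlist : stb_vorbis.comment_list s.mem g.f = 0)
    (hrsp8 : (s.reg .rsp).toNat + 8 = g.R) (hrdi : (s.reg .rdi).toNat = g.f)
    (hrsi : (s.reg .rsi).toNat % 2 ^ 32 = 8 * n)
    (hsame : Mem.SameExcept ((setup_malloc.spec A.2 g.frames' A.1).footprint s) s.mem r.mem)
    (hpost : (setup_malloc.spec A.2 g.frames' A.1).post s r)
    (hrip : r.rip = Vorbis.L.start_decoder.cut53) (hrsp : r.reg .rsp = addr g.R) (hcode : CodeOK u₀ r.mem)
    (hinv : abiInv r) (hrbp : r.reg .rbp = addr g.f) : ∃ A', AtRet u₀ g A' len n r := by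
  obtain ⟨r1, r2, r3, f1, f2, f3, f4, a1, a2, a3, a4, a5⟩ := hgeo
  have hgeo := geo_of hb.frame hb.hand hb.sd.arena hb.sd.env.ok
  have eR : g.R = (g.e.reg .rsp).toNat - 1480 := rfl
  have hf : g.f + 1808 ≤ 2 ^ 64 := by omega
  simp only [X86.User.Spec.footprint, vspec, hrdi, hrsi] at hsame
  simp only [setup_malloc.spec, hrdi, hrsi] at hpost
  obtain ⟨hyes, hno⟩ := hpost
  have ha := hb.sd.arena
  obtain ⟨b1, b2, _, _⟩ := ha.AR2
  by_cases hfit : A.1.Fits (8 * n)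
  · -- success: the ghost arena grows by the table
    obtain ⟨hrax, harena', hsh'⟩ := hyes hfit
    rw [hrsp8] at hsh'
    have hfit' : A.1.S + 32 + r8 (8 * n) ≤ A.1.T := hfit
    have hr8 := le_r8 (8 * n)
    have hext := A.1.extends_pushSetup (8 * n)
    have hsub : ∀ o, o ∈ A.2 → o ∈ A.1.newSetupObj (8 * n) :: A.2 := fun o ho => List.mem_cons_of_mem _ ho
    have hs := sameExcept_append hs0 hsame
    have hw : ∀ w, w ∈ ws0 ++ [(⟨(s.reg .rsp).toNat - 80, (s.reg .rsp).toNat⟩ : Span), ⟨g.f + 8, g.f + 12⟩,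
        ⟨g.f + 128, g.f + 132⟩, shadowSpan (A.1.B + A.1.S + 32) (A.1.B + A.1.S + 32 + 8 * n)] → OKWin g A.1 w := by
      intro w hw
      rcases List.mem_append.mp hw with h | h
      · exact hw0 w h
      · simp only [List.mem_cons, List.mem_nil_iff, or_false] at h
        rcases h with rfl | rfl | rfl | rfl
        · unfold OKWin
          simp only []
          omega
        · unfold OKWin
          simp only []
          omega
        · unfold OKWin
          simp only []
          omega
        · exact okwin_new_shadow g A.1 (8 * n) hfit (by omega)
    have hwB : ∀ w, w ∈ [(⟨(s.reg .rsp).toNat - 80, (s.reg .rsp).toNat⟩ : Span), ⟨g.f + 8, g.f + 12⟩,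
        ⟨g.f + 128, g.f + 132⟩, shadowSpan (A.1.B + A.1.S + 32) (A.1.B + A.1.S + 32 + 8 * n)] → OKWinB g A.1 w := by
      simp only [List.forall_mem_cons, List.not_mem_nil, false_imp_iff, implies_true, and_true, OKWinB, shadowSpan]
      omega
    have hbits1 := bits_carry hgeo hbits0 hsame hwB
    have hh' : g.Hand (A.1.pushSetup (8 * n), A.1.newSetupObj (8 * n) :: A.2) := hb.hand.mono hext hsub
    have henv := env_grow (A' := (A.1.pushSetup (8 * n), A.1.newSetupObj (8 * n) :: A.2)) hb.sd.env hh' hsub hsh' harena'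
    have hbits' : Bits (g.Blk (A.1.pushSetup (8 * n), A.1.newSetupObj (8 * n) :: A.2)) g.len r.mem g.f :=
      hbits1.reblk (runBlk_extra List.mem_cons_self) (runBlk_extra (List.mem_cons_of_mem _ List.mem_cons_self))
    have e24 : Mem.EqOn (g.f + 24) (g.f + 48) s.mem r.mem := by
      apply hsame.eqOn
      simp only [List.forall_mem_cons, List.not_mem_nil, false_imp_iff, implies_true, and_true, shadowSpan]
      omega
    obtain ⟨e1, e2, e3⟩ := comment_fields_kept hf e24
    refine ⟨(A.1.pushSetup (8 * n), A.1.newSetupObj (8 * n) :: A.2), ?_⟩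
    refine
      { frame := frame_carry hb.frame hgeo hs hw hrip hrsp hcode hinv hsh' ?_ hext
        hand := hh'
        rbp := hrbp
        sd := sdw_carry hb.sd hgeo hs hw henv harena' hbits'
        noTemps := ?_
        len_le := hb.len_le
        vendor := ?_
        n_pos := hn1
        n_le := hn2
        length := by rw [e2]; exact hlen
        list0 := by rw [e3]; exact hlist
        result := Or.inr ⟨?_, ?_⟩ }
    · intro o ho
      rcases List.mem_cons.mp ho with rfl | ho'
      · have ht := hb.hand.arenaText
        show L.textHi ≤ A.1.B + (A.1.S + 32)
        omega
      · exact hb.frame.offText o ho'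
    · simp only [varena]
      exact hb.noTemps
    · rw [e1, hvend]
      exact hb.vendor.mono hext
    · omega
    · have e : (r.reg .rax).toNat = A.1.B + (A.1.S + 32) := by omega
      rw [e]
      exact (ha.since_pushSetup (8 * n)).blk
  · -- failure: NULL; nothing but the callee's stack and `setup_memory_required` written
    obtain ⟨hrax, harena', hunp, hfail⟩ := hno hfit
    have hs := sameExcept_append hs0 hfail
    have hw : ∀ w, w ∈ ws0 ++ [(⟨(s.reg .rsp).toNat - 80, (s.reg .rsp).toNat⟩ : Span), ⟨g.f + 8, g.f + 12⟩] →
        OKWin g A.1 w := by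
      intro w hw
      rcases List.mem_append.mp hw with h | h
      · exact hw0 w h
      · simp only [List.mem_cons, List.mem_nil_iff, or_false] at h
        rcases h with rfl | rfl
        · unfold OKWin
          simp only []
          omega
        · unfold OKWin
          simp only []
          omega
    have hwB : ∀ w, w ∈ [(⟨(s.reg .rsp).toNat - 80, (s.reg .rsp).toNat⟩ : Span), ⟨g.f + 8, g.f + 12⟩] →
        OKWinB g A.1 w := by
      simp only [List.forall_mem_cons, List.not_mem_nil, false_imp_iff, implies_true, and_true, OKWinB]
      omega
    have hbits1 := bits_carry hgeo hbits0 hfail hwB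
    have hun : ShadowUntouched v.mem r.mem := hun0.trans hunp
    have e24 : Mem.EqOn (g.f + 24) (g.f + 48) s.mem r.mem := by
      apply hfail.eqOn
      simp only [List.forall_mem_cons, List.not_mem_nil, false_imp_iff, implies_true, and_true]
      omega
    obtain ⟨e1, e2, e3⟩ := comment_fields_kept hf e24
    refine ⟨A, ?_⟩
    exact
      { frame := frame_carry hb.frame hgeo hs hw hrip hrsp hcode hinv (hb.frame.shadow.untouched hun) hb.frame.offText
          (Arena.Extends.refl _)
        hand := hb.hand
        rbp := hrbp
        sd := sdw_carry hb.sd hgeo hs hw (hb.sd.env.eqOn hun) harena' hbits1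
        noTemps := hb.noTemps
        len_le := hb.len_le
        vendor := by rw [e1, hvend]; exact hb.vendor
        n_pos := hn1
        n_le := hn2
        length := by rw [e2]; exact hlen
        list0 := by rw [e3]; exact hlist
        result := Or.inl hrax }

/-- **`Body7` with `i = 0` at 0x11409e, from the return of the allocation** (`AtRet`, same ghost arena): the stores since
(`hs`, windows `OKWin`) wrote no shadow byte; the arena layer and `Bits` of the new memory are given; `vendor` is unchanged, CM2
holds for the table, every slot of it is NULL, and the spill slot of `i` holds 0. -/
theorem body7_of_ret {u₀ : State} {g : Ghost} {A : Arena × List Obj} {len n : Nat} {r s : State} {ws : List Span}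
    (hat : AtRet u₀ g A len n r) (hgeo : Geo g A.1) (hs : Mem.SameExcept ws r.mem s.mem)
    (hw : ∀ w, w ∈ ws → OKWin g A.1 w) (hun : ShadowUntouched r.mem s.mem)
    (harena : ArenaOK A.1 A.2 s.mem g.f) (hbits : Bits (g.Blk A) g.len s.mem g.f)
    (hvend : stb_vorbis.vendor s.mem g.f = stb_vorbis.vendor r.mem g.f) (hcm2 : CM2 A.1.Blk s.mem g.f)
    (hnull : ∀ i : Nat, (i : Int) < stb_vorbis.comment_list_length s.mem g.f →
      s.mem.ptr (stb_vorbis.comment_list_at s.mem g.f i) = 0)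
    (hslot : s.mem.u32 (g.R + 0x18) = 0) (hrip : s.rip = pc_7) (hrsp : s.reg .rsp = addr g.R)
    (hcode : CodeOK u₀ s.mem) (hinv : abiInv s) (hrbp : s.reg .rbp = addr g.f) : Body7 u₀ g A 0 s := by
  exact
    { frame := frame_carry hat.frame hgeo hs hw hrip hrsp hcode hinv (hat.frame.shadow.untouched hun) hat.frame.offText
        (Arena.Extends.refl _)
      hand := hat.hand
      rbp := hrbp
      sd := sdw_carry hat.sd hgeo hs hw (hat.sd.env.eqOn hun) harena hbits
      noTemps := hat.noTemps
      slot_i := hslot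
      i_le := by omega
      comment :=
        { CM1 := Or.inr ⟨len, by have := hat.len_le; omega, by rw [hvend]; exact hat.vendor⟩
          CM2 := hcm2
          CM3 := ⟨fun i hi => absurd hi (Nat.not_lt_zero i), fun i _ hi => hnull i hi⟩
          le := Or.inr rfl } }

/-- **The epilogue's entry assertion after `return error(f, VORBIS_outofmem)`** (0x113b22 with eax = 0), from the return of the
failed allocation (`AtRet`): the stores since are inside windows `OKWin`, no shadow byte was written, `comment_list_length` was
reset to 0 (FIX 2: H1's first disjunct). -/
theorem err_of_ret {u₀ : State} {g : Ghost} {A : Arena × List Obj} {len n : Nat} {r s : State} {ws : List Span}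
    (hat : AtRet u₀ g A len n r) (hgeo : Geo g A.1) (hs : Mem.SameExcept ws r.mem s.mem)
    (hw : ∀ w, w ∈ ws → OKWin g A.1 w) (hun : ShadowUntouched r.mem s.mem) (harena : ArenaOK A.1 A.2 s.mem g.f)
    (hbits : Bits (g.Blk A) g.len s.mem g.f) (hn : stb_vorbis.comment_list_length s.mem g.f ≤ 0)
    (hrax : (s.reg .rax).toNat % 2 ^ 32 = 0) (hrip : s.rip = pc_ERR) (hrsp : s.reg .rsp = addr g.R)
    (hcode : CodeOK u₀ s.mem) (hinv : abiInv s) : AtERR u₀ g s := by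
  have hsd := sdw_carry hat.sd hgeo hs hw (hat.sd.env.eqOn hun) harena hbits
  exact ⟨A, frame_carry hat.frame hgeo hs hw hrip hrsp hcode hinv (hat.frame.shadow.untouched hun) hat.frame.offText
    (Arena.Extends.refl _), hat.hand, Or.inl ⟨hrax, SDw.failed hsd (by omega) (Or.inl hn)⟩⟩

/-- **The exit of loop 3682** (`i = len`) UP TO THE RETURN OF `setup_malloc` (0x113fb7): the terminator `vendor[len] = 0`,
`comment_list_length = get32_packet(f)`, `comment_list = NULL`, FIX 2's two tests, `setup_malloc(f, 8·n)`. Exits: `At7`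
(0x11409e, `n ≤ 0`), `AtERR` (`n > 0FFFFFFFH`: length reset, `error`), or `AtRet` at the return of the allocation (then
`1 ≤ n ≤ 0FFFFFFFH`; the pure part is `ret_of_call`). -/
theorem exit_to_ret {Lay : Layout} (hLay : Lay.hi = 0x1000000) {μ : Microarch} (hμ : UserX.MicroOK μ) {u₀ : State}
    (hcode : HasCodeNat Lay u₀ Vorbis.L.start_decoder.entry Vorbis.Code.code_start_decoder.nat Vorbis.L.start_decoder.size)
    {g : Ghost} {A : Arena × List Obj} {len : Nat} {v : State}
    (h_ld8 : Asan.SmallCheck Lay μ Vorbis.WayInv (Vorbis.CodeOK u₀) [.rax, .rcx, .rdx] 8 Vorbis.L.__asan_load8_noabort.entry)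
    (h_st1 : Asan.SmallCheck Lay μ Vorbis.WayInv (Vorbis.CodeOK u₀) [.rax, .rdx] 1 Vorbis.L.__asan_store1_noabort.entry)
    (hg32 : Calls Lay μ Vorbis.WayInv (Vorbis.conv u₀) Vorbis.L.get32_packet.entry
      (Vorbis.Spec.get32_packet.spec A.2 g.frames' (g.Blk A) g.len))
    (h_st4 : Asan.SmallCheck Lay μ Vorbis.WayInv (Vorbis.CodeOK u₀) [.rax, .rcx, .rdx] 4 Vorbis.L.__asan_store4_noabort.entry)
    (h_st8 : Asan.SmallCheck Lay μ Vorbis.WayInv (Vorbis.CodeOK u₀) [.rax, .rcx, .rdx] 8 Vorbis.L.__asan_store8_noabort.entry)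
    (h_err : ∀ (others : List Obj) (frames : List (Nat × FrameLayout)),
      Calls Lay μ Vorbis.WayInv (Vorbis.conv u₀) Vorbis.L.error.entry (Vorbis.Spec.error.spec others frames))
    (hsm : Calls Lay μ Vorbis.WayInv (Vorbis.conv u₀) Vorbis.L.setup_malloc.entry
      (Vorbis.Spec.setup_malloc.spec A.2 g.frames' A.1))
    (hb : Body6 u₀ g A len len v) :
    ReachVia Lay μ WayInv v (fun v' => (At7 u₀ g v' ∨ AtERR u₀ g v') ∨ ∃ A' n, AtRet u₀ g A' len n v') := by
  have he := hb.frame.entry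
  v_entry he
  simp only [depth] at he_room he_stack
  have hR := r_def g
  have hgeo := geo_of hb.frame hb.hand hb.sd.arena hb.sd.env.ok
  obtain ⟨g1, g2, g3, g4, g5, g6, g7, g8, g9, g10, g11, g12⟩ := hgeo
  have hlen := hb.len_le
  have hfr := hb.frame
  have hgeo := geo_of hb.frame hb.hand hb.sd.arena hb.sd.env.ok
  have v_rip : v.rip = Vorbis.L.start_decoder.cut50 := hfr.rip
  have v_rsp : v.reg .rsp = g.e.reg .rsp - 1480 := by
    rw [hfr.rsp]
    exact addr_R g (by omega)
  have v_rbp : v.reg .rbp = addr g.f := hb.rbp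
  have v_r12 : v.reg .r12 = addr len := hb.r12
  have v_r13 : v.reg .r13 = addr len := hb.r13
  have w_eq : Mem.EqOn Vorbis.L.textLo Vorbis.L.textHi u₀.mem v.mem := hfr.code
  have hdf : v.flags .df = false := (show abiInv _ from hfr.inv).1
  have hmx : v.mxcsr &&& 0x1F80 = 0x1F80 := (show abiInv _ from hfr.inv).2
  have hsse := Vorbis.sseOK_of_abiInv hfr.inv
  have r24 : v.mem.readLE (addr g.f + 24) 8 = stb_vorbis.vendor v.mem g.f := by
    simp only [vfield, vacc, voff]
  have hf64 : (addr g.f).toNat = g.f := toNat_addr g.f (by omega)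
  have htl : (Word.part Width.w32 (addr len)).toInt = (len : Int) := toInt_part32_addr len (by omega)
  have hobj : LiveIn A.2 g.frames' g.f 1808 := hb.hand.obj.mono (frames'_sub g A.2)
  have hvl : LiveIn A.2 g.frames' (stb_vorbis.vendor v.mem g.f) (len + 1) := liveIn_of_arenaBlk hb.sd.arena hb.vendor
  have hvin := arena_inside hb.sd.arena hb.vendor
  simp only [] at hvin
  obtain ⟨hv1, hv2⟩ := hvin
  have gtext : 1154368 ≤ A.1.B := hb.hand.arenaText
  have hsx := sext_addr len (by omega)
  have hav : (addr (len + stb_vorbis.vendor v.mem g.f)).toNat = len + stb_vorbis.vendor v.mem g.f :=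
    toNat_addr _ (by omega)
  u_walk hcode [hμ.vendor] until [Vorbis.L.start_decoder.cut60, Vorbis.L.start_decoder.cut4] span [Vorbis.L.textLo, Vorbis.L.textHi] side (v_side)
  · -- check_113f31: the load of `f->vendor`
    have hun : ShadowUntouched v.mem s_113f31.mem := by v_untouched
    exact hobj.accSmall hfr.shadow hun _ 8 (by decide) (by u_omega) (by u_omega)
  · -- check_113f40: the store `vendor[len]`
    have hun : ShadowUntouched v.mem s_113f40.mem := by v_untouched
    rw [hsx, addr_add]
    exact hvl.accSmall hfr.shadow hun _ 1 (by decide) (by omega) (by omega)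
  · -- side_code
    rw [hsx, addr_add, hav]
    omega
  · -- call_inv
    v_inv
  · -- pre of get32_packet
    show ReaderPre A.2 g.frames' (g.Blk A) g.len s_113f4d
    rw [hsx, addr_add] at w_mem
    refine ⟨shadowPre_call hfr ?_ ?_, ?_, ?_⟩
    · rw [w_rsp]
      u_omega
    · v_untouched
    · rw [w_rdi, hf64]
      exact readerEnv hb.hand hb.sd.env.live
    · rw [w_rdi, hf64]
      have hs0 : Mem.SameExcept [⟨(g.e.reg .rsp).toNat - 1888, (g.e.reg .rsp).toNat - 1480⟩,
          ⟨A.1.B, A.1.B + A.1.L⟩] v.mem s_113f4d.mem := by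
        u_same
      have hw0 : ∀ w, w ∈ [(⟨(g.e.reg .rsp).toNat - 1888, (g.e.reg .rsp).toNat - 1480⟩ : Span),
          ⟨A.1.B, A.1.B + A.1.L⟩] → OKWinB g A.1 w := by
        simp only [List.forall_mem_cons, List.not_mem_nil, false_imp_iff, implies_true, and_true, OKWinB]
        omega
      exact bits_carry hgeo hb.sd.bits hs0 hw0
  · -- after get32_packet returned (0x113f52)
    v_after_call w_rsp_113f4d w_mem_113f4d
    simp only [w_rdi_113f4d, hf64] at w_same
    rw [hsx, addr_add] at w_same
    have hpost : Get32PacketPost (g.Blk A) g.len g.f s_113f4d s_113f4dr := by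
      have := w_post
      simp only [get32_packet.spec, w_rdi_113f4d, hf64] at this
      exact this
    have hsame1 : Mem.SameExcept [⟨(g.e.reg .rsp).toNat - 1888, (g.e.reg .rsp).toNat - 1480⟩,
        ⟨g.f + 48, g.f + 56⟩, ⟨g.f + 84, g.f + 96⟩, ⟨g.f + 136, g.f + 144⟩, ⟨g.f + 1484, g.f + 1749⟩,
        ⟨g.f + 1752, g.f + 1764⟩, ⟨g.f + 1768, g.f + 1784⟩, ⟨A.1.B, A.1.B + A.1.L⟩] v.mem s_113f4dr.mem := by
      u_same
    obtain ⟨z, w_rax⟩ : ∃ z, s_113f4dr.reg .rax = z := ⟨_, rfl⟩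
    have hz : z.toNat < 2 ^ 32 := by
      have := hpost.result
      rw [w_rax] at this
      exact this
    have hun1 : ShadowUntouched v.mem s_113f4dr.mem := by v_untouched
    have herr := h_err A.2 g.frames'
    u_walk hcode [hμ.vendor] until [Vorbis.L.start_decoder.cut60, Vorbis.L.start_decoder.cut4] span [Vorbis.L.textLo, Vorbis.L.textHi] side (v_side)
    · -- check_113f59: the store `f->comment_list_length`
      have hun : ShadowUntouched v.mem s_113f59.mem := by v_untouched
      exact hobj.accSmall hfr.shadow hun _ 4 (by decide) (by u_omega) (by u_omega)
    · -- check_113f66: the store `f->comment_list = NULL`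
      have hun : ShadowUntouched v.mem s_113f66.mem := by v_untouched
      exact hobj.accSmall hfr.shadow hun _ 8 (by decide) (by u_omega) (by u_omega)
    · -- call_inv (error, FIX 2's first arm)
      v_inv
    · -- pre of error
      refine ⟨shadowPre_call hfr ?_ ?_, ?_⟩
      · rw [w_rsp]
        u_omega
      · v_untouched
      · rw [w_rdi, hf64]
        exact hobj
    · -- call_inv (setup_malloc)
      v_inv
    · -- pre of setup_malloc: the shadow layer, OB1, the arena layer, the arena above the text
      refine ⟨shadowPre_call hfr ?_ ?_, ?_, ?_, hb.hand.arenaText⟩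
      · rw [w_rsp]
        u_omega
      · v_untouched
      · rw [w_rdi, hf64]
        exact hobj.blockLive
      · rw [w_rdi, hf64]
        apply hb.sd.arena.frame
        · simp only [voff]
          omega
        · simp only [voff]
          u_memnorm
          u_eqon
    · -- after error returned (0x113fa2)
      have rlen0 : s_113f9d.mem.readLE (addr g.f + 32) 4 = 0 := by
        u_resolve
      have w_eq := Vorbis.conv_code_eqOn w_code
      have w_df := (show X86.User.abiInv _ from w_inv).1
      have w_mx := (show X86.User.abiInv _ from w_inv).2
      have w_sse := Vorbis.sseOK_of_abiInv w_inv
      simp only [X86.User.Spec.footprint, vspec, w_rsp_113f9d, w_rdi_113f9d, hf64] at w_same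
      have ha32 : (addr g.f + 32).toNat = g.f + 32 := by
        rw [addr_add_lit]
        exact toNat_addr _ (by omega)
      have rlen : s_113f9dr.mem.readLE (addr g.f + 32) 4 = 0 := by
        rw [w_same.readLE (addr g.f + 32) 4 (by omega) ?_]
        · exact rlen0
        · simp only [List.forall_mem_cons, List.not_mem_nil, false_imp_iff, implies_true, and_true]
          u_omega
      rw [w_mem_113f9d] at w_same
      obtain ⟨hrax, _, _⟩ := w_post
      have w_rax : s_113f9dr.reg .rax = 0 := hrax
      u_walk hcode [hμ.vendor] until [Vorbis.L.start_decoder.cut60, Vorbis.L.start_decoder.cut4] span [Vorbis.L.textLo, Vorbis.L.textHi] side (v_side)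
      have hs : Mem.SameExcept [⟨(g.e.reg .rsp).toNat - 1888, (g.e.reg .rsp).toNat - 1480⟩,
          ⟨g.f + 48, g.f + 56⟩, ⟨g.f + 84, g.f + 96⟩, ⟨g.f + 136, g.f + 144⟩, ⟨g.f + 1484, g.f + 1749⟩,
          ⟨g.f + 1752, g.f + 1764⟩, ⟨g.f + 1768, g.f + 1784⟩, ⟨A.1.B, A.1.B + A.1.L⟩, ⟨g.f + 32, g.f + 48⟩]
          v.mem s_113fa2.mem := by
        u_same
      have hw : ∀ w, w ∈ [(⟨(g.e.reg .rsp).toNat - 1888, (g.e.reg .rsp).toNat - 1480⟩ : Span),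
          ⟨g.f + 48, g.f + 56⟩, ⟨g.f + 84, g.f + 96⟩, ⟨g.f + 136, g.f + 144⟩, ⟨g.f + 1484, g.f + 1749⟩,
          ⟨g.f + 1752, g.f + 1764⟩, ⟨g.f + 1768, g.f + 1784⟩, ⟨A.1.B, A.1.B + A.1.L⟩, ⟨g.f + 32, g.f + 48⟩] →
          OKWin g A.1 w := by
        simp only [List.forall_mem_cons, List.not_mem_nil, false_imp_iff, implies_true, and_true, OKWin]
        omega
      have hs2 : Mem.SameExcept [⟨(g.e.reg .rsp).toNat - 1888, (g.e.reg .rsp).toNat - 1480⟩, ⟨g.f + 32, g.f + 48⟩,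
          ⟨g.f + 140, g.f + 144⟩] s_113f4dr.mem s_113fa2.mem := by
        u_same
      have hw2 : ∀ w, w ∈ [(⟨(g.e.reg .rsp).toNat - 1888, (g.e.reg .rsp).toNat - 1480⟩ : Span), ⟨g.f + 32, g.f + 48⟩,
          ⟨g.f + 140, g.f + 144⟩] → OKWinB g A.1 w := by
        simp only [List.forall_mem_cons, List.not_mem_nil, false_imp_iff, implies_true, and_true, OKWinB]
        omega
      have hbits := bits_carry hgeo hpost.reader.bits hs2 hw2
      have hun : ShadowUntouched v.mem s_113fa2.mem := by v_untouched
      have hinv : abiInv s_113fa2 := by v_inv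
      have e112 : Mem.EqOn (g.f + 112) (g.f + 136) v.mem s_113fa2.mem := by
        apply hs.eqOn
        simp only [List.forall_mem_cons, List.not_mem_nil, false_imp_iff, implies_true, and_true]
        omega
      have harena : ArenaOK A.1 A.2 s_113fa2.mem g.f := by
        apply hb.sd.arena.frame
        · simp only [voff]
          omega
        · simp only [voff]
          exact e112
      have hn : stb_vorbis.comment_list_length s_113fa2.mem g.f ≤ 0 := by
        have r : s_113fa2.mem.readLE (addr g.f + 32) 4 = 0 := by
          rw [w_mem]
          exact rlen
        rw [length_of_read r]
        decide
      refine ReachVia.done (Or.inl (Or.inr ?_))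
      refine err_exit hb hgeo hs hw hun harena hbits hn ?_ ?_ ?_ w_eq hinv
      · rw [w_rax]
        rfl
      · rw [w_rip]
      · rw [w_rsp]
        exact (addr_R g (by omega)).symm
    · -- after setup_malloc returned (0x113fb7): `AtRet`
      obtain ⟨hnz, hmsb⟩ := hbr_113f7f
      obtain ⟨_, hpe, hp31⟩ := sint32_pos (Word.part Width.w32 z) hnz hmsb
      have hn2 := le_of_not_jg (Word.part Width.w32 z) hbr_113f7a hmsb
      have hs0 : Mem.SameExcept [⟨(g.e.reg .rsp).toNat - 1888, (g.e.reg .rsp).toNat - 1480⟩,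
          ⟨g.f + 48, g.f + 56⟩, ⟨g.f + 84, g.f + 96⟩, ⟨g.f + 136, g.f + 144⟩, ⟨g.f + 1484, g.f + 1749⟩,
          ⟨g.f + 1752, g.f + 1764⟩, ⟨g.f + 1768, g.f + 1784⟩, ⟨A.1.B, A.1.B + A.1.L⟩, ⟨g.f + 32, g.f + 48⟩]
          v.mem s_113fb2.mem := by
        rw [w_mem_113fb2]
        u_same
      have hw0 : ∀ w, w ∈ [(⟨(g.e.reg .rsp).toNat - 1888, (g.e.reg .rsp).toNat - 1480⟩ : Span),
          ⟨g.f + 48, g.f + 56⟩, ⟨g.f + 84, g.f + 96⟩, ⟨g.f + 136, g.f + 144⟩, ⟨g.f + 1484, g.f + 1749⟩,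
          ⟨g.f + 1752, g.f + 1764⟩, ⟨g.f + 1768, g.f + 1784⟩, ⟨A.1.B, A.1.B + A.1.L⟩, ⟨g.f + 32, g.f + 48⟩] →
          OKWin g A.1 w := by
        simp only [List.forall_mem_cons, List.not_mem_nil, false_imp_iff, implies_true, and_true, OKWin]
        omega
      have hs2 : Mem.SameExcept [⟨(g.e.reg .rsp).toNat - 1888, (g.e.reg .rsp).toNat - 1480⟩, ⟨g.f + 32, g.f + 48⟩]
          s_113f4dr.mem s_113fb2.mem := by
        rw [w_mem_113fb2]
        u_same
      have hw2 : ∀ w, w ∈ [(⟨(g.e.reg .rsp).toNat - 1888, (g.e.reg .rsp).toNat - 1480⟩ : Span), ⟨g.f + 32, g.f + 48⟩] →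
          OKWinB g A.1 w := by
        simp only [List.forall_mem_cons, List.not_mem_nil, false_imp_iff, implies_true, and_true, OKWinB]
        omega
      have hbits0 := bits_carry hgeo hpost.reader.bits hs2 hw2
      have hun0 : ShadowUntouched v.mem s_113fb2.mem := by
        rw [w_mem_113fb2]
        v_untouched
      have e24 : Mem.EqOn (g.f + 24) (g.f + 32) v.mem s_113fb2.mem := by
        apply hs0.eqOn
        simp only [List.forall_mem_cons, List.not_mem_nil, false_imp_iff, implies_true, and_true]
        omega
      have hvend : stb_vorbis.vendor s_113fb2.mem g.f = stb_vorbis.vendor v.mem g.f := by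
        simp only [vacc, voff]
        exact e24.u64 _ (by omega) (by omega) (by omega)
      have rlen : s_113fb2.mem.readLE (addr g.f + 32) 4 = (Word.part Width.w32 z).toNat := by
        u_resolve
        exact Nat.mod_eq_of_lt (Word.part Width.w32 z).isLt
      have hlen : stb_vorbis.comment_list_length s_113fb2.mem g.f = (((Word.part Width.w32 z).toNat : Nat) : Int) := by
        rw [length_of_read rlen]
        exact hpe
      have rlist : s_113fb2.mem.readLE (addr g.f + 40) 8 = 0 := by
        u_resolve
      have hlist := list_of_read rlist
      have hrsp8 : (s_113fb2.reg .rsp).toNat + 8 = g.R := by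
        rw [w_rsp_113fb2]
        u_omega
      have hrdi : (s_113fb2.reg .rdi).toNat = g.f := by
        rw [w_rdi_113fb2]
        exact hf64
      have hrsi : (s_113fb2.reg .rsi).toNat % 2 ^ 32 = 8 * (Word.part Width.w32 z).toNat := by
        rw [w_rsi_113fb2, lea8 _ hn2]
        omega
      have hrbp : s_113fb2r.reg .rbp = addr g.f := by
        rw [w_kept .rbp rfl]
        exact v_rbp
      have hrsp : s_113fb2r.reg .rsp = addr g.R := by
        rw [w_rsp]
        exact (addr_R g (by omega)).symm
      obtain ⟨A', hA'⟩ := ret_of_call hb hgeo hs0 hw0 hun0 hbits0 hvend hlen (by omega) hn2 hlist hrsp8 hrdi hrsi w_same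
        w_post (by rw [w_rip]) hrsp (Vorbis.conv_code_eqOn w_code) w_inv hrbp
      exact ReachVia.done (Or.inr ⟨A', _, hA'⟩)
    · -- 0x11409e with `n ≤ 0`: `At7`
      have hs : Mem.SameExcept [⟨(g.e.reg .rsp).toNat - 1888, (g.e.reg .rsp).toNat - 1480⟩,
          ⟨g.f + 48, g.f + 56⟩, ⟨g.f + 84, g.f + 96⟩, ⟨g.f + 136, g.f + 144⟩, ⟨g.f + 1484, g.f + 1749⟩,
          ⟨g.f + 1752, g.f + 1764⟩, ⟨g.f + 1768, g.f + 1784⟩, ⟨A.1.B, A.1.B + A.1.L⟩, ⟨g.f + 32, g.f + 48⟩,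
          ⟨(g.e.reg .rsp).toNat - 1456, (g.e.reg .rsp).toNat - 1448⟩] v.mem s_113f89.mem := by
        u_same
      have hw : ∀ w, w ∈ [(⟨(g.e.reg .rsp).toNat - 1888, (g.e.reg .rsp).toNat - 1480⟩ : Span),
          ⟨g.f + 48, g.f + 56⟩, ⟨g.f + 84, g.f + 96⟩, ⟨g.f + 136, g.f + 144⟩, ⟨g.f + 1484, g.f + 1749⟩,
          ⟨g.f + 1752, g.f + 1764⟩, ⟨g.f + 1768, g.f + 1784⟩, ⟨A.1.B, A.1.B + A.1.L⟩, ⟨g.f + 32, g.f + 48⟩,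
          ⟨(g.e.reg .rsp).toNat - 1456, (g.e.reg .rsp).toNat - 1448⟩] → OKWin g A.1 w := by
        simp only [List.forall_mem_cons, List.not_mem_nil, false_imp_iff, implies_true, and_true, OKWin]
        omega
      have hs2 : Mem.SameExcept [⟨(g.e.reg .rsp).toNat - 1888, (g.e.reg .rsp).toNat - 1480⟩, ⟨g.f + 32, g.f + 48⟩,
          ⟨(g.e.reg .rsp).toNat - 1456, (g.e.reg .rsp).toNat - 1448⟩] s_113f4dr.mem s_113f89.mem := by
        u_same
      have hw2 : ∀ w, w ∈ [(⟨(g.e.reg .rsp).toNat - 1888, (g.e.reg .rsp).toNat - 1480⟩ : Span), ⟨g.f + 32, g.f + 48⟩,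
          ⟨(g.e.reg .rsp).toNat - 1456, (g.e.reg .rsp).toNat - 1448⟩] → OKWinB g A.1 w := by
        simp only [List.forall_mem_cons, List.not_mem_nil, false_imp_iff, implies_true, and_true, OKWinB]
        omega
      have hbits := bits_carry hgeo hpost.reader.bits hs2 hw2
      have hun : ShadowUntouched v.mem s_113f89.mem := by v_untouched
      have hinv : abiInv s_113f89 := by v_inv
      have e112 : Mem.EqOn (g.f + 112) (g.f + 136) v.mem s_113f89.mem := by
        apply hs.eqOn
        simp only [List.forall_mem_cons, List.not_mem_nil, false_imp_iff, implies_true, and_true]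
        omega
      have e24 : Mem.EqOn (g.f + 24) (g.f + 32) v.mem s_113f89.mem := by
        apply hs.eqOn
        simp only [List.forall_mem_cons, List.not_mem_nil, false_imp_iff, implies_true, and_true]
        omega
      have harena : ArenaOK A.1 A.2 s_113f89.mem g.f := by
        apply hb.sd.arena.frame
        · simp only [voff]
          omega
        · simp only [voff]
          exact e112
      have hvend : stb_vorbis.vendor s_113f89.mem g.f = stb_vorbis.vendor v.mem g.f := by
        simp only [vacc, voff]
        exact e24.u64 _ (by omega) (by omega) (by omega)
      have rlen : s_113f89.mem.readLE (addr g.f + 32) 4 = (Word.part Width.w32 z).toNat := by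
        u_resolve
        exact Nat.mod_eq_of_lt (Word.part Width.w32 z).isLt
      have hn : stb_vorbis.comment_list_length s_113f89.mem g.f ≤ 0 := by
        rw [length_of_read rlen]
        apply sint32_nonpos
        by_cases h0 : (Word.part Width.w32 z).toNat = 0
        · exact Or.inl h0
        · right
          cases hm : (Word.part Width.w32 z).msb
          · exact absurd ⟨h0, hm⟩ hbr_113f7f
          · rfl
      have eslot : addr (g.R + 0x18) = g.e.reg .rsp - 1456 := by
        apply (eq_addr _ _ ?_).symm
        u_omega
      have hslot : s_113f89.mem.u32 (g.R + 0x18) = 0 := by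
        unfold Mem.u32
        rw [eslot]
        u_resolve
      refine ReachVia.done (Or.inl (Or.inl ⟨A, 0, ?_⟩))
      refine body7_exit hb hgeo hs hw (Arena.Extends.refl _) (fun _ h => h) (hfr.shadow.untouched hun) hfr.offText
        harena hb.noTemps hbits hvend (Or.inl hn) (fun i hi => absurd hi (by omega)) hslot ?_ ?_ w_eq hinv ?_
      · rw [w_rip]
      · rw [w_rsp]
        exact (addr_R g (by omega)).symm
      · rw [w_kept .rbp rfl]
        exact v_rbp

/-- **The allocation returned NULL** (0x113fb7 … 0x114009 → 0x113b22; line 3692 + FIX 2): `f->comment_list = NULL` (checked store),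
the test, `f->comment_list_length = 0` (checked store), `error(f, VORBIS_outofmem)`, the jump to the epilogue: `AtERR`. -/
theorem ret_null {Lay : Layout} (hLay : Lay.hi = 0x1000000) {μ : Microarch} (hμ : UserX.MicroOK μ) {u₀ : State}
    (hcode : HasCodeNat Lay u₀ Vorbis.L.start_decoder.entry Vorbis.Code.code_start_decoder.nat Vorbis.L.start_decoder.size)
    {g : Ghost} {A : Arena × List Obj} {len n : Nat} {r : State}
    (h_st4 : Asan.SmallCheck Lay μ Vorbis.WayInv (Vorbis.CodeOK u₀) [.rax, .rcx, .rdx] 4 Vorbis.L.__asan_store4_noabort.entry)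
    (h_st8 : Asan.SmallCheck Lay μ Vorbis.WayInv (Vorbis.CodeOK u₀) [.rax, .rcx, .rdx] 8 Vorbis.L.__asan_store8_noabort.entry)
    (herr : Calls Lay μ Vorbis.WayInv (Vorbis.conv u₀) Vorbis.L.error.entry (Vorbis.Spec.error.spec A.2 g.frames'))
    (hat : AtRet u₀ g A len n r) (hnull : r.reg .rax = 0) :
    ReachVia Lay μ WayInv r (fun v' => At7 u₀ g v' ∨ AtERR u₀ g v') := by
  have he := hat.frame.entry
  v_entry he
  simp only [depth] at he_room he_stack
  have hR := r_def g
  have hgeo := geo_of hat.frame hat.hand hat.sd.arena hat.sd.env.ok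
  obtain ⟨g1, g2, g3, g4, g5, g6, g7, g8, g9, g10, g11, g12⟩ := hgeo
  have hfr := hat.frame
  have hgeo := geo_of hat.frame hat.hand hat.sd.arena hat.sd.env.ok
  have v_rip : r.rip = Vorbis.L.start_decoder.cut53 := hfr.rip
  have v_rsp : r.reg .rsp = g.e.reg .rsp - 1480 := by
    rw [hfr.rsp]
    exact addr_R g (by omega)
  have v_rbp : r.reg .rbp = addr g.f := hat.rbp
  have v_rax : r.reg .rax = 0 := hnull
  have w_eq : Mem.EqOn Vorbis.L.textLo Vorbis.L.textHi u₀.mem r.mem := hfr.code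
  have hdf : r.flags .df = false := (show abiInv _ from hfr.inv).1
  have hmx : r.mxcsr &&& 0x1F80 = 0x1F80 := (show abiInv _ from hfr.inv).2
  have hsse := Vorbis.sseOK_of_abiInv hfr.inv
  have hf64 : (addr g.f).toNat = g.f := toNat_addr g.f (by omega)
  have hobj : LiveIn A.2 g.frames' g.f 1808 := hat.hand.obj.mono (frames'_sub g A.2)
  u_walk hcode [hμ.vendor] until [Vorbis.L.start_decoder.cut60, Vorbis.L.start_decoder.cut4] span [Vorbis.L.textLo, Vorbis.L.textHi] side (v_side)
  · -- check_113fbe: the store `f->comment_list = NULL`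
    have hun : ShadowUntouched r.mem s_113fbe.mem := by v_untouched
    exact hobj.accSmall hfr.shadow hun _ 8 (by decide) (by u_omega) (by u_omega)
  · -- check_113ff0: the store `f->comment_list_length = 0` (FIX 2)
    have hun : ShadowUntouched r.mem s_113ff0.mem := by v_untouched
    exact hobj.accSmall hfr.shadow hun _ 4 (by decide) (by u_omega) (by u_omega)
  · -- call_inv (error)
    v_inv
  · -- pre of error
    refine ⟨shadowPre_call hfr ?_ ?_, ?_⟩
    · rw [w_rsp]
      u_omega
    · v_untouched
    · rw [w_rdi, hf64]
      exact hobj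
  · -- after error returned (0x114009)
    have rlen0 : s_114004.mem.readLE (addr g.f + 32) 4 = 0 := by
      u_resolve
    have w_eq := Vorbis.conv_code_eqOn w_code
    have w_df := (show X86.User.abiInv _ from w_inv).1
    have w_mx := (show X86.User.abiInv _ from w_inv).2
    have w_sse := Vorbis.sseOK_of_abiInv w_inv
    simp only [X86.User.Spec.footprint, vspec, w_rsp_114004, w_rdi_114004, hf64] at w_same
    have ha32 : (addr g.f + 32).toNat = g.f + 32 := by
      rw [addr_add_lit]
      exact toNat_addr _ (by omega)
    have rlen : s_114004r.mem.readLE (addr g.f + 32) 4 = 0 := by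
      rw [w_same.readLE (addr g.f + 32) 4 (by omega) ?_]
      · exact rlen0
      · simp only [List.forall_mem_cons, List.not_mem_nil, false_imp_iff, implies_true, and_true]
        u_omega
    rw [w_mem_114004] at w_same
    obtain ⟨hrax, _, _⟩ := w_post
    have w_rax : s_114004r.reg .rax = 0 := hrax
    u_walk hcode [hμ.vendor] until [Vorbis.L.start_decoder.cut60, Vorbis.L.start_decoder.cut4] span [Vorbis.L.textLo, Vorbis.L.textHi] side (v_side)
    have hs : Mem.SameExcept [⟨(g.e.reg .rsp).toNat - 1888, (g.e.reg .rsp).toNat - 1480⟩, ⟨g.f + 32, g.f + 48⟩,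
        ⟨g.f + 140, g.f + 144⟩] r.mem s_114009.mem := by
      u_same
    have hw : ∀ w, w ∈ [(⟨(g.e.reg .rsp).toNat - 1888, (g.e.reg .rsp).toNat - 1480⟩ : Span), ⟨g.f + 32, g.f + 48⟩,
        ⟨g.f + 140, g.f + 144⟩] → OKWinB g A.1 w := by
      simp only [List.forall_mem_cons, List.not_mem_nil, false_imp_iff, implies_true, and_true, OKWinB]
      omega
    have hbits := bits_carry hgeo hat.sd.bits hs hw
    have hun : ShadowUntouched r.mem s_114009.mem := by v_untouched
    have hinv : abiInv s_114009 := by v_inv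
    have e112 : Mem.EqOn (g.f + 112) (g.f + 136) r.mem s_114009.mem := by
      apply hs.eqOn
      simp only [List.forall_mem_cons, List.not_mem_nil, false_imp_iff, implies_true, and_true]
      omega
    have harena : ArenaOK A.1 A.2 s_114009.mem g.f := by
      apply hat.sd.arena.frame
      · simp only [voff]
        omega
      · simp only [voff]
        exact e112
    have hn : stb_vorbis.comment_list_length s_114009.mem g.f ≤ 0 := by
      have rd : s_114009.mem.readLE (addr g.f + 32) 4 = 0 := by
        rw [w_mem]
        exact rlen
      rw [length_of_read rd]
      decide
    refine ReachVia.done (Or.inr ?_)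
    refine err_of_ret hat hgeo hs (fun w h => (hw w h).ok) hun harena hbits hn ?_ ?_ ?_ w_eq hinv
    · rw [w_rax]
      rfl
    · rw [w_rip]
    · rw [w_rsp]
      exact (addr_R g (by omega)).symm

/-- The four bytes of `comment_list_length` from the `int` field, for a non-negative count. -/
theorem read_of_length {mem : Mem} {f n : Nat} (h : stb_vorbis.comment_list_length mem f = (n : Int)) (hn : n < 2 ^ 31) :
    mem.readLE (addr f + 32) 4 = n := by
  have h1 := length_of_read (mem := mem) (f := f) rfl
  rw [h] at h1
  have h2 := Mem.readLE_lt' mem (addr f + 32) 4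
  rcases sint32_cases (mem.readLE (addr f + 32) 4) with ⟨_, h4⟩ | ⟨_, h4⟩
  · omega
  · omega

/-- `movsxd rdx, [f->comment_list_length] ; shl rdx, 3` for a count `n < 2^31`: the size `8·n`, exact in 64 bits. -/
theorem sext_shl3 (m : Nat) (h : m < 2 ^ 31) :
    (Word.ofBV (BitVec.signExtend 64 (BitVec.ofNat 32 m)) <<< 3).toNat = 8 * m := by
  have e3 : (3 : UInt64).toNat % 64 = 3 := by decide
  rw [cnt32_sext_bv m h, UInt64.toNat_shiftLeft, UInt64.toNat_ofNat', e3, Nat.shiftLeft_eq]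
  omega

/-- **The allocation returned the table** (0x113fb7 … 0x113fea → 0x113f81 … 0x11409e; lines 3691, 3692 + FIX 12, 3700):
`f->comment_list = p` (checked store), the test, `memset(p, 0, 8·n)` with the length re-loaded (checked load), `i = 0`: `At7`. -/
theorem ret_ok {Lay : Layout} (hLay : Lay.hi = 0x1000000) {μ : Microarch} (hμ : UserX.MicroOK μ) {u₀ : State}
    (hcode : HasCodeNat Lay u₀ Vorbis.L.start_decoder.entry Vorbis.Code.code_start_decoder.nat Vorbis.L.start_decoder.size)
    {g : Ghost} {A : Arena × List Obj} {len n : Nat} {r : State}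
    (h_ld4 : Asan.SmallCheck Lay μ Vorbis.WayInv (Vorbis.CodeOK u₀) [.rax, .rcx, .rdx] 4 Vorbis.L.__asan_load4_noabort.entry)
    (h_st8 : Asan.SmallCheck Lay μ Vorbis.WayInv (Vorbis.CodeOK u₀) [.rax, .rcx, .rdx] 8 Vorbis.L.__asan_store8_noabort.entry)
    (hms : Calls Lay μ Vorbis.WayInv (Vorbis.conv u₀) Vorbis.L.memset.entry (Vorbis.Spec.memset.spec A.2 g.frames'))
    (hat : AtRet u₀ g A len n r) (hne : (r.reg .rax).toNat ≠ 0) (hblk : A.1.Blk ⟨(r.reg .rax).toNat, 8 * n⟩) :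
    ReachVia Lay μ WayInv r (fun v' => At7 u₀ g v' ∨ AtERR u₀ g v') := by
  have he := hat.frame.entry
  v_entry he
  simp only [depth] at he_room he_stack
  have hR := r_def g
  have hgeo := geo_of hat.frame hat.hand hat.sd.arena hat.sd.env.ok
  obtain ⟨g1, g2, g3, g4, g5, g6, g7, g8, g9, g10, g11, g12⟩ := hgeo
  have hfr := hat.frame
  have hgeo := geo_of hat.frame hat.hand hat.sd.arena hat.sd.env.ok
  have hn1 := hat.n_pos
  have hn2 := hat.n_le
  obtain ⟨p, hp⟩ : ∃ p : Nat, (r.reg .rax).toNat = p := ⟨_, rfl⟩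
  rw [hp] at hne hblk
  have v_rip : r.rip = Vorbis.L.start_decoder.cut53 := hfr.rip
  have v_rsp : r.reg .rsp = g.e.reg .rsp - 1480 := by
    rw [hfr.rsp]
    exact addr_R g (by omega)
  have v_rbp : r.reg .rbp = addr g.f := hat.rbp
  have v_rax : r.reg .rax = addr p := eq_addr _ _ hp
  have w_eq : Mem.EqOn Vorbis.L.textLo Vorbis.L.textHi u₀.mem r.mem := hfr.code
  have hdf : r.flags .df = false := (show abiInv _ from hfr.inv).1
  have hmx : r.mxcsr &&& 0x1F80 = 0x1F80 := (show abiInv _ from hfr.inv).2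
  have hsse := Vorbis.sseOK_of_abiInv hfr.inv
  have hf64 : (addr g.f).toNat = g.f := toNat_addr g.f (by omega)
  have hobj : LiveIn A.2 g.frames' g.f 1808 := hat.hand.obj.mono (frames'_sub g A.2)
  have hpl : LiveIn A.2 g.frames' p (8 * n) := liveIn_of_arenaBlk hat.sd.arena hblk
  have hpin := arena_inside hat.sd.arena hblk
  simp only [] at hpin
  obtain ⟨hp1, hp2⟩ := hpin
  have gtext : 1154368 ≤ A.1.B := hat.hand.arenaText
  have hp64 : (addr p).toNat = p := toNat_addr p (by omega)
  have r32 : r.mem.readLE (addr g.f + 32) 4 = n := read_of_length hat.length (by omega)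
  have hshl := sext_shl3 n (by omega)
  u_walk hcode [hμ.vendor] until [Vorbis.L.start_decoder.cut60, Vorbis.L.start_decoder.cut4] span [Vorbis.L.textLo, Vorbis.L.textHi] side (v_side)
  · -- check_113fbe: the store `f->comment_list = p`
    have hun : ShadowUntouched r.mem s_113fbe.mem := by v_untouched
    exact hobj.accSmall hfr.shadow hun _ 8 (by decide) (by u_omega) (by u_omega)
  · -- check_113fd0: the load of `f->comment_list_length`
    have hun : ShadowUntouched r.mem s_113fd0.mem := by v_untouched
    exact hobj.accSmall hfr.shadow hun _ 4 (by decide) (by u_omega) (by u_omega)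
  · -- call_inv (memset)
    v_inv
  · -- pre of memset
    refine ⟨shadowPre_call hfr ?_ ?_, Or.inr ?_⟩
    · rw [w_rsp]
      u_omega
    · v_untouched
    · rw [w_rdi, w_rdx, hp64, hshl]
      exact hpl
  · -- after memset returned (0x113fea)
    have h40 : s_113fe5.mem.readLE (addr g.f + 40) 8 = p := by
      u_resolve
    have hpost := w_post
    simp only [memset.spec, w_rdi_113fe5, w_rdx_113fe5, w_rsi_113fe5, hshl] at hpost
    obtain ⟨_, hunp, hzero⟩ := hpost
    v_after_call w_rsp_113fe5 w_mem_113fe5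
    simp only [w_rdi_113fe5, w_rdx_113fe5, hp64, hshl] at w_same
    rw [w_mem_113fe5, hp64] at h40
    have h40r : s_113fe5r.mem.readLE (addr g.f + 40) 8 = p := by
      u_frame h40
    u_walk hcode [hμ.vendor] until [Vorbis.L.start_decoder.cut60, Vorbis.L.start_decoder.cut4] span [Vorbis.L.textLo, Vorbis.L.textHi] side (v_side)
    have hs : Mem.SameExcept [⟨(g.e.reg .rsp).toNat - 1888, (g.e.reg .rsp).toNat - 1480⟩, ⟨g.f + 40, g.f + 48⟩,
        ⟨p, p + 8 * n⟩, ⟨(g.e.reg .rsp).toNat - 1456, (g.e.reg .rsp).toNat - 1448⟩] r.mem s_113f89.mem := by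
      u_same
    have hw : ∀ w, w ∈ [(⟨(g.e.reg .rsp).toNat - 1888, (g.e.reg .rsp).toNat - 1480⟩ : Span), ⟨g.f + 40, g.f + 48⟩,
        ⟨p, p + 8 * n⟩, ⟨(g.e.reg .rsp).toNat - 1456, (g.e.reg .rsp).toNat - 1448⟩] → OKWinB g A.1 w := by
      simp only [List.forall_mem_cons, List.not_mem_nil, false_imp_iff, implies_true, and_true, OKWinB]
      omega
    have hbits := bits_carry hgeo hat.sd.bits hs hw
    have hun : ShadowUntouched r.mem s_113f89.mem := by v_untouched
    have hinv : abiInv s_113f89 := by v_inv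
    have e112 : Mem.EqOn (g.f + 112) (g.f + 136) r.mem s_113f89.mem := by
      apply hs.eqOn
      simp only [List.forall_mem_cons, List.not_mem_nil, false_imp_iff, implies_true, and_true]
      omega
    have e24 : Mem.EqOn (g.f + 24) (g.f + 40) r.mem s_113f89.mem := by
      apply hs.eqOn
      simp only [List.forall_mem_cons, List.not_mem_nil, false_imp_iff, implies_true, and_true]
      omega
    have harena : ArenaOK A.1 A.2 s_113f89.mem g.f := by
      apply hat.sd.arena.frame
      · simp only [voff]
        omega
      · simp only [voff]
        exact e112
    have hvend : stb_vorbis.vendor s_113f89.mem g.f = stb_vorbis.vendor r.mem g.f := by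
      simp only [vacc, voff]
      exact e24.u64 _ (by omega) (by omega) (by omega)
    have hlenf : stb_vorbis.comment_list_length s_113f89.mem g.f = (n : Int) := by
      rw [← hat.length]
      simp only [vacc, voff]
      exact e24.i32 _ (by omega) (by omega) (by omega)
    have h40f : s_113f89.mem.readLE (addr g.f + 40) 8 = p := by
      u_frame h40r
    have hlistf : stb_vorbis.comment_list s_113f89.mem g.f = p := list_of_read h40f
    have e0 : UInt64.toNat (Word.ofBV 0#32) % 256 = 0 := by decide
    rw [e0] at hzero
    have hz : ∀ j, j < 8 * n → s_113f89.mem.readLE (addr p + UInt64.ofNat j) 1 = 0 := by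
      intro j hj
      have := hzero j hj
      u_frame this
    have hcm2 : CM2 A.1.Blk s_113f89.mem g.f := by
      right
      refine ⟨by rw [hlenf]; omega, ?_⟩
      rw [hlistf, hlenf, Int.toNat_natCast]
      exact hblk
    have hnull := null_of_zero (by omega) hlistf hz hlenf
    have eslot : addr (g.R + 0x18) = g.e.reg .rsp - 1456 := by
      apply (eq_addr _ _ ?_).symm
      u_omega
    have hslot : s_113f89.mem.u32 (g.R + 0x18) = 0 := by
      unfold Mem.u32
      rw [eslot]
      u_resolve
    refine ReachVia.done (Or.inl ⟨A, 0, ?_⟩)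
    refine body7_of_ret hat hgeo hs (fun w h => (hw w h).ok) hun harena hbits hvend hcm2 hnull hslot ?_ ?_ w_eq hinv ?_
    · rw [w_rip]
    · rw [w_rsp]
      exact (addr_R g (by omega)).symm
    · rw [w_kept .rbp rfl]
      exact v_rbp

/-- **Segment `start_decoder.6`**: loop 3682 by `ReachVia.loop` (invariant `At6`, measure `len − i` read from r13 and r12), then
the exit path in three parts: up to the return of `setup_malloc` (`exit_to_ret`), and from there the NULL arm (`ret_null`) or the
zero fill and `i = 0` (`ret_ok`). -/
theorem seg6 (Lay : Layout) (hLay : Lay.hi = 0x1000000) (μ : Microarch) (hμ : UserX.MicroOK μ) (u₀ : State)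
    (hcode : HasCodeNat Lay u₀ Vorbis.L.start_decoder.entry Vorbis.Code.code_start_decoder.nat Vorbis.L.start_decoder.size)
    (h_get8 : ∀ (others : List Obj) (frames : List (Nat × FrameLayout)) (Blk : Block → Prop) (len : Nat), Calls Lay μ Vorbis.WayInv (Vorbis.conv u₀) Vorbis.L.get8_packet.entry (Vorbis.Spec.get8_packet.spec others frames Blk len))
    (h_ld8 : Asan.SmallCheck Lay μ Vorbis.WayInv (Vorbis.CodeOK u₀) [.rax, .rcx, .rdx] 8 Vorbis.L.__asan_load8_noabort.entry)
    (h_st1 : Asan.SmallCheck Lay μ Vorbis.WayInv (Vorbis.CodeOK u₀) [.rax, .rdx] 1 Vorbis.L.__asan_store1_noabort.entry)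
    (h_get32 : ∀ (others : List Obj) (frames : List (Nat × FrameLayout)) (Blk : Block → Prop) (len : Nat), Calls Lay μ Vorbis.WayInv (Vorbis.conv u₀) Vorbis.L.get32_packet.entry (Vorbis.Spec.get32_packet.spec others frames Blk len))
    (h_st4 : Asan.SmallCheck Lay μ Vorbis.WayInv (Vorbis.CodeOK u₀) [.rax, .rcx, .rdx] 4 Vorbis.L.__asan_store4_noabort.entry)
    (h_st8 : Asan.SmallCheck Lay μ Vorbis.WayInv (Vorbis.CodeOK u₀) [.rax, .rcx, .rdx] 8 Vorbis.L.__asan_store8_noabort.entry)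
    (h_err : ∀ (others : List Obj) (frames : List (Nat × FrameLayout)), Calls Lay μ Vorbis.WayInv (Vorbis.conv u₀) Vorbis.L.error.entry (Vorbis.Spec.error.spec others frames))
    (h_sm : ∀ (others : List Obj) (frames : List (Nat × FrameLayout)) (A : Arena), Calls Lay μ Vorbis.WayInv (Vorbis.conv u₀) Vorbis.L.setup_malloc.entry (Vorbis.Spec.setup_malloc.spec others frames A))
    (h_ld4 : Asan.SmallCheck Lay μ Vorbis.WayInv (Vorbis.CodeOK u₀) [.rax, .rcx, .rdx] 4 Vorbis.L.__asan_load4_noabort.entry)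
    (h_ms : ∀ (others : List Obj) (frames : List (Nat × FrameLayout)), Calls Lay μ Vorbis.WayInv (Vorbis.conv u₀) Vorbis.L.memset.entry (Vorbis.Spec.memset.spec others frames)) :
    Vorbis.Spec.StartDecoder.Seg6 Lay μ u₀ := by
  intro g
  refine ReachVia.loop (Inv := fun v => At6 u₀ g v) (Post := fun w => At7 u₀ g w ∨ AtERR u₀ g w)
    (fun v => (v.reg .r13).toNat - (v.reg .r12).toNat) ?_
  intro v hat
  obtain ⟨A, i, len, hb⟩ := hat
  have hlen := hb.len_le
  have e13 : (v.reg .r13).toNat = len := by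
    rw [hb.r13]
    exact toNat_addr len (by omega)
  by_cases hi : i < len
  · -- one more byte of the vendor string (0x113efe … 0x113f24)
    refine (loop_body hLay hμ hcode (h_get8 A.2 g.frames' (g.Blk A) g.len) h_ld8 h_st1 hb hi).mono ?_
    intro w hw
    rcases hw with hx | ⟨⟨i', hb'⟩, hlt⟩
    · exact Or.inl hx
    · refine Or.inr ⟨⟨A, i', len, hb'⟩, ?_⟩
      have e13' : (w.reg .r13).toNat = len := by
        rw [hb'.r13]
        exact toNat_addr len (by omega)
      show (w.reg .r13).toNat - (w.reg .r12).toNat < (v.reg .r13).toNat - (v.reg .r12).toNat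
      rw [e13, e13']
      exact hlt
  · -- `i = len`: the loop is left (0x113f2d …)
    have e : i = len := by
      have := hb.i_le
      omega
    rw [e] at hb
    refine (exit_to_ret hLay hμ hcode h_ld8 h_st1 (h_get32 A.2 g.frames' (g.Blk A) g.len) h_st4 h_st8 h_err
      (h_sm A.2 g.frames' A.1) hb).trans ?_
    intro w hw
    rcases hw with hx | ⟨A', n, hr⟩
    · exact ReachVia.done (Or.inl hx)
    · rcases hr.result with h0 | ⟨hne, hblk⟩
      · exact (ret_null hLay hμ hcode h_st4 h_st8 (h_err A'.2 g.frames') hr h0).mono (fun _ h => Or.inl h)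
      · exact (ret_ok hLay hμ hcode h_ld4 h_st8 (h_ms A'.2 g.frames') hr hne hblk).mono (fun _ h => Or.inl h)

end Vorbis.Spec.start_decoder_6
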